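-- pv_equiv track=rewrite | github.com/yutongli18/LeetCode2023 | 2024.8.7-2.py | getWin
-- ===== SOURCE A (Python) =====
-- from collections import deque
--
-- def getWin(n, x, edges):
--     # 计算入度
--     edge_dict = {}
--     in_degree = [0 for _ in range(n + 1)]
--     for u, v in edges:
--         in_degree[u] += 1
--         edge_dict.setdefault(u, [])
--         edge_dict[u].append(v)
--         in_degree[v] += 1
--         edge_dict.setdefault(v, [])
--         edge_dict[v].append(u)
--     count = 0
--     selected = [False for _ in range(n + 1)]
--     # 入度为1的节点入队
--     queue = deque([])
--     for pid in range(1, n + 1):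
--         if in_degree[pid] == 1:
--             if pid == x:
--                 return 'xiaoyo'
--             queue.append(pid)
--     while queue:
--         for _ in range(len(queue)):
--             pid = queue.popleft()
--             count += 1
--             selected[pid] = True
--             for tid in edge_dict[pid]:
--                 if not selected[tid]:
--                     in_degree[tid] -= 1
--                     if in_degree[tid] == 1:
--                         queue.append(tid)
--         if selected[x]:
--             break
--     if not selected[x]:
--         return 'Draw'
--     if count % 2 == 0:
--         return 'Pyrmont'
--     return 'Xiaoyo'
-- ===== SOURCE B (Python) =====
-- def getWin(n, x, edges):
--     # Fixpoint re-scan peeling: no queue, no adjacency structure, no degree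
--     # decrements -- each round recomputes every node's degree among still-live
--     # nodes straight from the edge list and peels all nodes whose live degree
--     # has dropped to <= 1, recording the round number; the winner is decided
--     # from the recorded rounds afterwards.
--     deg = [0] * (n + 1)
--     for u, v in edges:
--         deg[u] += 1
--         deg[v] += 1
--     if 1 <= x <= n and deg[x] == 1:
--         return 'xiaoyo'
--     level = [-1] * (n + 1)
--     lvl = 0
--     while True:
--         live = [0] * (n + 1)
--         for u, v in edges:
--             if level[u] == -1 and level[v] == -1:
--                 live[u] += 1
--                 live[v] += 1
--         wave = [p for p in range(1, n + 1)
--                 if level[p] == -1 and live[p] <= 1 and deg[p] >= 1]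
--         if not wave:
--             break
--         for p in wave:
--             level[p] = lvl
--         lvl += 1
--     lx = level[x]
--     if lx == -1:
--         return 'Draw'
--     count = sum(1 for p in range(1, n + 1) if level[p] != -1 and level[p] <= lx)
--     return 'Pyrmont' if count % 2 == 0 else 'Xiaoyo'
-- ===== Notes on version B (the rewrite author's own statement) =====
-- stated objective: alternative
-- what changed: B drops A's adjacency dict, BFS queue and in-place degree decrements entirely: each round it recomputes every node's degree among still-live nodes straight from the edge list and peels all nodes whose live degree fell to <= 1, recording round numbers, and the winner (initial-leaf check, Draw, prefix parity) is decided in a separate post-pass.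
-- outside the precondition, e.g. on getWin(4, 2, [[0, 2], [2, 1], [0, 3], [2, 4]]): A returns 'Xiaoyo', B returns 'Pyrmont'; on getWin(3, 3, [[-1, 0], [-1, -2], [0, 1], [2, 2]]): A returns 'Xiaoyo', B returns 'Draw'; on getWin(6, 2, [[2, 0], [3, 4], [-1, 2], [4, 6]]): A returns 'Draw', B returns 'Pyrmont'
import Mathlib
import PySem

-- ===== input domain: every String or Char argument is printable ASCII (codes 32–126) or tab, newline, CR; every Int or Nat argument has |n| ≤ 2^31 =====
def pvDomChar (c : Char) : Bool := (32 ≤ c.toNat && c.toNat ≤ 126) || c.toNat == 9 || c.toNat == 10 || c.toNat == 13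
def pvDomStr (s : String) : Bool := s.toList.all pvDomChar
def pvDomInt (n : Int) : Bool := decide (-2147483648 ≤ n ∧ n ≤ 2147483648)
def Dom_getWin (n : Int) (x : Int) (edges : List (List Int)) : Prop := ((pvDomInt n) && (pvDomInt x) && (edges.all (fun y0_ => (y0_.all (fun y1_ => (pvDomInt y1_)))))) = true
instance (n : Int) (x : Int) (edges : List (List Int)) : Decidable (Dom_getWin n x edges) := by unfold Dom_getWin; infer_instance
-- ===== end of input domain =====

-- B replaces A's queue-driven BFS peeling (adjacency dict + in-place degree decrements +
-- early break) by a queue-free fixpoint re-scan: each round recomputes every node's degree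
-- among still-live nodes directly from the edge list and peels all nodes whose live degree
-- fell to <= 1, recording round numbers; the winner is read off afterwards
-- (objective: alternative algorithmic mechanism, same results).

-- ===== PORT A =====
-- builds in_degree (a Python list, indexed with Python semantics) and edge_dict, edge by edge
def buildA (edges : List (List Int)) (deg0 : List Int) :
    PySem.Dict Int (List Int) × List Int :=
  edges.foldl (fun st e =>
    match e with
    | [u, v] =>
      let deg1 := PySem.List.pySetD st.2 u (PySem.List.pyGetD st.2 u 0 + 1)
      let d1 := (st.1.setdefault u []).modify u [] (fun l => l ++ [v])
      let deg2 := PySem.List.pySetD deg1 v (PySem.List.pyGetD deg1 v 0 + 1)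
      let d2 := (d1.setdefault v []).modify v [] (fun l => l ++ [u])
      (d2, deg2)
    | _ => st) (PySem.Dict.empty, deg0)

-- the 'for pid in range(1, n+1)' scan with its early return (none = 'return "xiaoyo"')
def scanA (deg : List Int) (x : Int) : List Int → List Int → Option (List Int)
  | queue, [] => some queue
  | queue, pid :: rest =>
    if PySem.List.pyGetD deg pid 0 == 1 then
      if pid == x then none
      else scanA deg x (queue ++ [pid]) rest
    else scanA deg x queue rest

-- body of 'for tid in edge_dict[pid]' (state: in_degree, the queue being appended to)
def innerA (sel : List Bool) (st : List Int × List Int) (tid : Int) : List Int × List Int :=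
  if PySem.List.pyGetD sel tid false then st
  else
    let deg := PySem.List.pySetD st.1 tid (PySem.List.pyGetD st.1 tid 0 - 1)
    if PySem.List.pyGetD deg tid 0 == 1 then (deg, st.2 ++ [tid]) else (deg, st.2)

-- one popleft: count += 1, selected[pid] = True, the inner for
def stepA (d : PySem.Dict Int (List Int)) (st : (List Int × List Bool × Int) × List Int)
    (pid : Int) : (List Int × List Bool × Int) × List Int :=
  let count := st.1.2.2 + 1
  let sel := PySem.List.pySetD st.1.2.1 pid true
  let dn := (d.getD pid []).foldl (innerA sel) (st.1.1, st.2)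
  ((dn.1, sel, count), dn.2)

-- 'while queue:' — one iteration processes the current snapshot, then checks selected[x];
-- fuel only makes the recursion total (ample: each wave consumes at least one queue entry)
def loopA (d : PySem.Dict Int (List Int)) (x : Int) :
    Nat → List Int → List Int × List Bool × Int → List Bool × Int
  | 0, _, st => (st.2.1, st.2.2)
  | fuel+1, queue, st =>
    if queue.isEmpty then (st.2.1, st.2.2)
    else
      let r := queue.foldl (stepA d) (st, [])
      if PySem.List.pyGetD r.1.2.1 x false then (r.1.2.1, r.1.2.2)
      else loopA d x fuel r.2 r.1

def getWin (n : Int) (x : Int) (edges : List (List Int)) : String :=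
  let deg0 := (PySem.List.pyRange 0 (n+1) 1).map (fun _ => (0:Int))
  let bd := buildA edges deg0
  let sel0 := (PySem.List.pyRange 0 (n+1) 1).map (fun _ => false)
  match scanA bd.2 x [] (PySem.List.pyRange 1 (n+1) 1) with
  | none => "xiaoyo"
  | some queue =>
    let r := loopA bd.1 x (n.toNat + 2 * edges.length + 1) queue (bd.2, sel0, 0)
    if PySem.List.pyGetD r.1 x false then
      if PySem.Int.mod r.2 2 == 0 then "Pyrmont" else "Xiaoyo"
    else "Draw"

-- ===== PORT B =====
-- Source B's plain degree count: for u, v in edges: deg[u] += 1; deg[v] += 1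
def degB (n : Int) (edges : List (List Int)) : List Int :=
  edges.foldl (fun deg e =>
    match e with
    | [u, v] =>
      let d1 := PySem.List.pySetD deg u (PySem.List.pyGetD deg u 0 + 1)
      PySem.List.pySetD d1 v (PySem.List.pyGetD d1 v 0 + 1)
    | _ => deg) ((PySem.List.pyRange 0 (n+1) 1).map (fun _ => (0:Int)))

-- one round's recount of degrees among still-live nodes, straight from the edge list
def liveB (n : Int) (edges : List (List Int)) (level : List Int) : List Int :=
  edges.foldl (fun lv e =>
    match e with
    | [u, v] =>
      if (PySem.List.pyGetD level u 0 == -1) && (PySem.List.pyGetD level v 0 == -1) then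
        let l1 := PySem.List.pySetD lv u (PySem.List.pyGetD lv u 0 + 1)
        PySem.List.pySetD l1 v (PySem.List.pyGetD l1 v 0 + 1)
      else lv
    | _ => lv) ((PySem.List.pyRange 0 (n+1) 1).map (fun _ => (0:Int)))

-- 'while True:' of Source B; fuel only makes it total (n+1 rounds always reach the fixpoint)
def roundsB (n : Int) (edges : List (List Int)) (deg : List Int) :
    Nat → List Int → Int → List Int
  | 0, level, _ => level
  | fuel+1, level, lvl =>
    let live := liveB n edges level
    let wave := (PySem.List.pyRange 1 (n+1) 1).filter
      (fun p => (PySem.List.pyGetD level p 0 == -1) &&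
        decide (PySem.List.pyGetD live p 0 ≤ 1) && decide (1 ≤ PySem.List.pyGetD deg p 0))
    if wave.isEmpty then level
    else roundsB n edges deg fuel
      (wave.foldl (fun l p => PySem.List.pySetD l p lvl) level) (lvl+1)

def getWin_alt (n : Int) (x : Int) (edges : List (List Int)) : String :=
  let deg := degB n edges
  if (decide (1 ≤ x) && decide (x ≤ n)) && (PySem.List.pyGetD deg x 0 == 1) then "xiaoyo"
  else
    let level := roundsB n edges deg (n.toNat + 1)
      ((PySem.List.pyRange 0 (n+1) 1).map (fun _ => (-1:Int))) 0
    let lx := PySem.List.pyGetD level x (-1)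
    if lx == -1 then "Draw"
    else
      let count : Int := ((PySem.List.pyRange 1 (n+1) 1).filter
        (fun p => (PySem.List.pyGetD level p 0 != -1) &&
          decide (PySem.List.pyGetD level p 0 ≤ lx))).length
      if PySem.Int.mod count 2 == 0 then "Pyrmont" else "Xiaoyo"

-- ===== PRECONDITION & SPEC =====
-- Pre_ excludes exactly the inputs outside the task's natural domain (nodes are labelled
-- 1..n, x names a player): n < 0 or x outside the index range of selected (IndexError),
-- malformed edges (ValueError), and edges with labels outside 1..n — labels > n raise
-- IndexError, negative labels alias other nodes through Python's negative-index wraparound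
-- while being keyed separately in the dict (KeyError or accidental values), and label 0 is
-- silently skipped by A's range(1, n+1) leaf scan yet still removable by decrements, an
-- artefact of A's bookkeeping; A still returns accidental values on some such inputs
-- (see the cited examples).
def Pre_getWin (n : Int) (x : Int) (edges : List (List Int)) : Prop :=
  0 ≤ n ∧ -(n+1) ≤ x ∧ x ≤ n ∧
    ∀ e ∈ edges, e.length = 2 ∧ ∀ t ∈ e, 1 ≤ t ∧ t ≤ n
instance (n : Int) (x : Int) (edges : List (List Int)) : Decidable (Pre_getWin n x edges) := by
  unfold Pre_getWin; infer_instance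

def pvWitness_getWin : Int × Int × List (List Int) := (4, 2, [[1, 2], [2, 3], [3, 4]])

def Spec_getWin (n : Int) (x : Int) (edges : List (List Int)) (out : String) : Prop :=
  out = getWin_alt n x edges
instance (n : Int) (x : Int) (edges : List (List Int)) (out : String) :
    Decidable (Spec_getWin n x edges out) := by unfold Spec_getWin; infer_instance

-- ===== CLAIM (what is proved, stated in full; the proofs are below) =====
def Claim_equal_getWin : Prop := ∀ (n : Int) (x : Int) (edges : List (List Int)),
  Dom_getWin n x edges → Pre_getWin n x edges → Spec_getWin n x edges (getWin n x edges)

-- ===== LEMMAS AND PROOFS =====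

-- index helpers (in-range, nonnegative indices)
theorem pv_getD_dflt {α : Type} (l : List α) (i : Int) (d1 d2 : α)
    (h0 : 0 ≤ i) (hi : i < (l.length : Int)) :
    PySem.List.pyGetD l i d1 = PySem.List.pyGetD l i d2 := by
  rw [PySem.List.pyGetD_eq_getElem l d1 h0 hi, PySem.List.pyGetD_eq_getElem l d2 h0 hi]

theorem pv_getD_set {α : Type} (l : List α) (i j : Int) (v d : α)
    (h0 : 0 ≤ i) (hi : i < l.length) (h0j : 0 ≤ j) (hj : j < l.length) :
    PySem.List.pyGetD (PySem.List.pySetD l i v) j d = if j = i then v else PySem.List.pyGetD l j d := by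
  rw [PySem.List.pySetD_of_nonneg l v h0,
    PySem.List.pyGetD_eq_getElem _ d h0j (by simp; omega),
    List.getElem_set]
  by_cases h : j = i
  · simp [h]
  · have hne : ¬ (i.toNat = j.toNat) := by omega
    rw [if_neg hne, if_neg h, PySem.List.pyGetD_eq_getElem l d h0j hj]

theorem pv_getD_neg {α : Type} (l : List α) (x : Int) (d : α)
    (hneg : x < 0) (h : -(l.length : Int) ≤ x) :
    PySem.List.pyGetD l x d = PySem.List.pyGetD l (x + l.length) d := by
  have hk : x = -(((-x).toNat : Nat) : Int) := by omega
  rw [hk, PySem.List.pyGetD_neg_natCast l (-x).toNat d (by omega) (by omega),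
    PySem.List.pyGetD_eq_getElem l d (by omega) (by omega)]
  congr 1
  omega

-- counting helpers
theorem pv_countP_or {α : Type} (l : List α) (P Q : α → Bool)
    (hdis : ∀ a ∈ l, ¬(P a = true ∧ Q a = true)) :
    l.countP (fun a => P a || Q a) = l.countP P + l.countP Q := by
  induction l with
  | nil => simp
  | cons a l ih =>
    have ih' := ih (fun b hb => hdis b (List.mem_cons_of_mem a hb))
    by_cases hp : P a = true
    · have hq : Q a = false := by
        cases hQ : Q a
        · rfl
        · exact absurd ⟨hp, hQ⟩ (hdis a List.mem_cons_self)
      simp [hp, hq, ih']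
      omega
    · simp only [Bool.not_eq_true] at hp
      simp only [List.countP_cons, hp, ih']
      cases hQ : Q a <;> simp <;> omega

theorem pv_countP_split {α : Type} (l : List α) (P Q : α → Bool) :
    l.countP P = l.countP (fun a => P a && Q a) + l.countP (fun a => P a && !Q a) := by
  induction l with
  | nil => simp
  | cons a l ih =>
    simp only [List.countP_cons, ih]
    cases hp : P a <;> cases hq : Q a <;> simp <;> omega

theorem pv_countP_congr {α : Type} (l : List α) (P Q : α → Bool)
    (h : ∀ a ∈ l, P a = Q a) : l.countP P = l.countP Q := by
  induction l with
  | nil => rfl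
  | cons a l ih =>
    simp only [List.countP_cons, h a List.mem_cons_self,
      ih (fun b hb => h b (List.mem_cons_of_mem a hb))]
-- the undirected edge list as directed incidence pairs
def pvPairs (edges : List (List Int)) : List (Int × Int) :=
  edges.flatMap (fun e => match e with | [u, v] => [(u, v), (v, u)] | _ => [])

-- incidence count (degrees, live degrees, decrement totals are all of this shape)
def pvCnt (edges : List (List Int)) (P : Int × Int → Bool) : Int :=
  ((pvPairs edges).countP P : Int)

def pvDeg0 (edges : List (List Int)) (t : Int) : Int :=
  pvCnt edges (fun pr => pr.2 == t)

theorem pv_pairs_mem (n : Int) (edges : List (List Int))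
    (hge : ∀ e ∈ edges, e.length = 2 ∧ ∀ t ∈ e, 1 ≤ t ∧ t ≤ n) :
    ∀ pr ∈ pvPairs edges, (1 ≤ pr.1 ∧ pr.1 ≤ n) ∧ (1 ≤ pr.2 ∧ pr.2 ≤ n) := by
  intro pr hpr
  unfold pvPairs at hpr
  rw [List.mem_flatMap] at hpr
  obtain ⟨e, he, hin⟩ := hpr
  obtain ⟨hlen, hmem⟩ := hge e he
  match e, hlen with
  | [u, v], _ =>
    have hu := hmem u (by simp)
    have hv := hmem v (by simp)
    simp only [List.mem_cons, List.not_mem_nil, or_false] at hin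
    rcases hin with h | h <;> subst h <;> exact ⟨by tauto, by tauto⟩

-- setdefault-then-modify collapses to a bare modify (Python's dict assignment)
theorem pv_sd_modify (d : PySem.Dict Int (List Int)) (k : Int) (f : List Int → List Int) :
    (d.setdefault k []).modify k [] f = d.modify k [] f := by
  unfold PySem.Dict.modify
  by_cases hc : d.contains k = true
  · rw [PySem.Dict.setdefault_of_contains d [] hc]
  · have hc' : d.contains k = false := by simpa using hc
    rw [PySem.Dict.setdefault_of_not_contains d [] hc']
    rw [PySem.Dict.getD_insert_self]
    have hnk : ∀ p ∈ d.items, (p.1 == k) = false := by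
      intro p hp
      by_contra h
      exact hc (List.any_eq_true.mpr ⟨p, hp, by simpa using h⟩)
    have hgd : d.getD k [] = [] := by
      unfold PySem.Dict.getD PySem.Dict.get?
      rw [List.find?_eq_none.mpr (fun p hp => by simp [hnk p hp])]
      rfl
    rw [hgd]
    have hany : (d.items.any fun p => p.1 == k) = false := by
      simp only [List.any_eq_false]
      intro p hp
      simp [hnk p hp]
    have h1 : d.insert k [] = PySem.Dict.mk (d.items ++ [(k, [])]) := by
      unfold PySem.Dict.insert PySem.Dict.contains
      simp [hany]
    rw [h1]
    apply PySem.Dict.ext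
    unfold PySem.Dict.insert PySem.Dict.contains
    simp only [List.any_append, hany, List.any_cons, List.any_nil, beq_self_eq_true,
      Bool.false_or, Bool.or_false, if_true, Bool.false_eq_true, if_false]
    rw [List.map_append]
    have hid : List.map (fun p => if (p.1 == k) = true then (k, f []) else p) d.items = d.items := by
      have := List.map_congr_left (l := d.items)
        (f := fun p => if (p.1 == k) = true then (k, f []) else p) (g := id)
        (fun p hp => by simp [hnk p hp])
      simpa using this
    rw [hid]
    simp

-- pvBStep: one edge of A's build loop (same state shape as buildA's foldl function)
def pvBStep (st : PySem.Dict Int (List Int) × List Int) (e : List Int) :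
    PySem.Dict Int (List Int) × List Int :=
  match e with
  | [u, v] =>
    let deg1 := PySem.List.pySetD st.2 u (PySem.List.pyGetD st.2 u 0 + 1)
    let d1 := (st.1.setdefault u []).modify u [] (fun l => l ++ [v])
    let deg2 := PySem.List.pySetD deg1 v (PySem.List.pyGetD deg1 v 0 + 1)
    let d2 := (d1.setdefault v []).modify v [] (fun l => l ++ [u])
    (d2, deg2)
  | _ => st

theorem pv_buildA_eq (edges : List (List Int)) (deg0 : List Int) :
    buildA edges deg0 = edges.foldl pvBStep (PySem.Dict.empty, deg0) := rfl

-- the degree component of A's build is Source B's degree fold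
def pvDegStep (deg : List Int) (e : List Int) : List Int :=
  match e with
  | [u, v] =>
    let d1 := PySem.List.pySetD deg u (PySem.List.pyGetD deg u 0 + 1)
    PySem.List.pySetD d1 v (PySem.List.pyGetD d1 v 0 + 1)
  | _ => deg

theorem pv_degB_eq (n : Int) (edges : List (List Int)) :
    degB n edges = edges.foldl pvDegStep ((PySem.List.pyRange 0 (n+1) 1).map (fun _ => (0:Int))) := rfl

theorem pv_build_snd (edges : List (List Int)) :
    ∀ (st : PySem.Dict Int (List Int) × List Int),
    (edges.foldl pvBStep st).2 = edges.foldl pvDegStep st.2 := by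
  induction edges with
  | nil => intro st; rfl
  | cons e es ih =>
    intro st
    rw [List.foldl_cons, List.foldl_cons, ih]
    congr 1
    match e with
    | [] => rfl
    | [u] => rfl
    | [u, v] => rfl
    | u :: v :: w :: r => rfl

-- the dict component of A's build is the single-modify fold over the incidence pairs
theorem pv_build_fst (edges : List (List Int)) :
    ∀ (st : PySem.Dict Int (List Int) × List Int),
    (edges.foldl pvBStep st).1 =
      (pvPairs edges).foldl (fun d pr => d.modify pr.1 [] (fun l => l ++ [pr.2])) st.1 := by
  induction edges with
  | nil => intro st; rfl
  | cons e es ih =>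
    intro st
    rw [List.foldl_cons, ih]
    unfold pvPairs
    rw [List.flatMap_cons, List.foldl_append]
    congr 1
    match e with
    | [] => rfl
    | [u] => rfl
    | [u, v] => simp [pvBStep, pv_sd_modify]
    | u :: v :: w :: r => rfl

theorem pv_adj_getD (edges : List (List Int)) (deg0 : List Int) (p : Int) :
    (buildA edges deg0).1.getD p [] =
      ((pvPairs edges).filter (fun pr => pr.1 == p)).map (fun pr => pr.2) := by
  rw [pv_buildA_eq, pv_build_fst]
  rw [PySem.Dict.getD_foldl_modify_append]
  rfl
theorem pv_pairs_cons (e : List Int) (es : List (List Int)) :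
    pvPairs (e :: es) = (match e with | [u, v] => [(u, v), (v, u)] | _ => []) ++ pvPairs es := by
  unfold pvPairs
  rw [List.flatMap_cons]

theorem pv_cnt_cons (e : List Int) (es : List (List Int)) (P : Int × Int → Bool) :
    pvCnt (e :: es) P =
      ((match e with | [u, v] => [(u, v), (v, u)] | _ => []).countP P : Int) + pvCnt es P := by
  unfold pvCnt
  rw [pv_pairs_cons, List.countP_append]
  push_cast
  ring

theorem pv_degstep_len (deg : List Int) (e : List Int) :
    (pvDegStep deg e).length = deg.length := by
  match e with
  | [] => rfl
  | [u] => rfl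
  | [u, v] => simp [pvDegStep, PySem.List.length_pySetD]
  | u :: v :: w :: r => rfl

theorem pv_degstep_get (deg : List Int) (u v t : Int)
    (hu : 0 ≤ u) (hu2 : u < deg.length) (hv : 0 ≤ v) (hv2 : v < deg.length)
    (ht : 0 ≤ t) (ht2 : t < deg.length) :
    PySem.List.pyGetD (pvDegStep deg [u, v]) t 0 =
      PySem.List.pyGetD deg t 0 + (if u = t then 1 else 0) + (if v = t then 1 else 0) := by
  show PySem.List.pyGetD
      (PySem.List.pySetD (PySem.List.pySetD deg u (PySem.List.pyGetD deg u 0 + 1)) v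
        (PySem.List.pyGetD (PySem.List.pySetD deg u (PySem.List.pyGetD deg u 0 + 1)) v 0 + 1)) t 0 = _
  rw [pv_getD_set _ v t _ _ hv (by rw [PySem.List.length_pySetD]; exact hv2) ht
        (by rw [PySem.List.length_pySetD]; exact ht2),
      pv_getD_set _ u v _ _ hu hu2 hv hv2,
      pv_getD_set _ u t _ _ hu hu2 ht ht2]
  split_ifs <;> subst_vars <;> (first | exact absurd rfl (by assumption) | ring)

theorem pv_pair_countP (u v t : Int) :
    (([(u, v), (v, u)] : List (Int × Int)).countP (fun pr => pr.2 == t) : Int) =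
      (if u = t then 1 else 0) + (if v = t then 1 else 0) := by
  simp only [List.countP_cons, List.countP_nil]
  by_cases h1 : u = t <;> by_cases h2 : v = t <;> simp [h1, h2]

theorem pv_deg0_cons (u v t : Int) (es : List (List Int)) :
    pvDeg0 ([u, v] :: es) t =
      (if u = t then 1 else 0) + (if v = t then 1 else 0) + pvDeg0 es t := by
  unfold pvDeg0
  rw [pv_cnt_cons]
  show (((([(u, v), (v, u)] : List (Int × Int)).countP (fun pr => pr.2 == t)) : Int) + pvCnt es _) = _
  rw [pv_pair_countP]

-- the degree fold computes the incidence count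
theorem pv_degF_spec (n : Int) (edges : List (List Int)) :
    ∀ (acc : List Int), (∀ e ∈ edges, e.length = 2 ∧ ∀ s ∈ e, 1 ≤ s ∧ s ≤ n) →
      (n : Int) < acc.length →
      (edges.foldl pvDegStep acc).length = acc.length ∧
      ∀ t : Int, 0 ≤ t → t ≤ n →
        PySem.List.pyGetD (edges.foldl pvDegStep acc) t 0 =
          PySem.List.pyGetD acc t 0 + pvDeg0 edges t := by
  induction edges with
  | nil =>
    intro acc _ _
    refine ⟨rfl, fun t _ _ => ?_⟩
    unfold pvDeg0 pvCnt pvPairs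
    simp
  | cons e es ih =>
    intro acc hge hlen
    obtain ⟨hlen2, hmem⟩ := hge e List.mem_cons_self
    match e, hlen2 with
    | [u, v], _ =>
      have hu := hmem u (by simp)
      have hv := hmem v (by simp)
      have hstep : (pvDegStep acc [u, v]).length = acc.length := pv_degstep_len acc _
      obtain ⟨ihl, ihg⟩ := ih (pvDegStep acc [u, v])
        (fun e' he' => hge e' (List.mem_cons_of_mem _ he')) (by rw [hstep]; exact hlen)
      rw [List.foldl_cons]
      refine ⟨by rw [ihl, hstep], fun t h0 h1 => ?_⟩
      rw [ihg t h0 h1,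
        pv_degstep_get acc u v t (by omega) (by omega) (by omega) (by omega) h0 (by omega),
        pv_deg0_cons]
      ring

-- one edge of Source B's live-recount loop (the port's foldl function, named)
def pvLiveStep (level : List Int) (lv : List Int) (e : List Int) : List Int :=
  match e with
  | [u, v] =>
    if (PySem.List.pyGetD level u 0 == -1) && (PySem.List.pyGetD level v 0 == -1) then
      let l1 := PySem.List.pySetD lv u (PySem.List.pyGetD lv u 0 + 1)
      PySem.List.pySetD l1 v (PySem.List.pyGetD l1 v 0 + 1)
    else lv
  | _ => lv

theorem pv_liveB_eq (n : Int) (edges : List (List Int)) (level : List Int) :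
    liveB n edges level =
      edges.foldl (pvLiveStep level) ((PySem.List.pyRange 0 (n+1) 1).map (fun _ => (0:Int))) := rfl

-- the per-pair live predicate
def pvLiveP (level : List Int) (pr : Int × Int) : Bool :=
  (PySem.List.pyGetD level pr.1 0 == -1) && (PySem.List.pyGetD level pr.2 0 == -1)

theorem pv_livestep_len (level lv : List Int) (e : List Int) :
    (pvLiveStep level lv e).length = lv.length := by
  match e with
  | [] => rfl
  | [u] => rfl
  | [u, v] =>
    simp only [pvLiveStep]
    split
    · simp [PySem.List.length_pySetD]
    · rfl
  | u :: v :: w :: r => rfl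

theorem pv_pair_countP_live (level : List Int) (u v t : Int) :
    (([(u, v), (v, u)] : List (Int × Int)).countP (fun pr => pvLiveP level pr && pr.2 == t) : Int) =
      if pvLiveP level (u, v) then (if u = t then 1 else 0) + (if v = t then 1 else 0) else 0 := by
  have hsymm : pvLiveP level (v, u) = pvLiveP level (u, v) := by
    unfold pvLiveP
    simp only
    cases h1 : (PySem.List.pyGetD level u 0 == -1) <;>
      cases h2 : (PySem.List.pyGetD level v 0 == -1) <;> simp [h1, h2]
  simp only [List.countP_cons, List.countP_nil, hsymm]
  cases hl : pvLiveP level (u, v) <;> by_cases h1 : u = t <;> by_cases h2 : v = t <;> simp_all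

theorem pv_liveF_spec (n : Int) (edges : List (List Int)) (level : List Int) :
    ∀ (acc : List Int), (∀ e ∈ edges, e.length = 2 ∧ ∀ s ∈ e, 1 ≤ s ∧ s ≤ n) →
      (n : Int) < acc.length →
      (edges.foldl (pvLiveStep level) acc).length = acc.length ∧
      ∀ t : Int, 0 ≤ t → t ≤ n →
        PySem.List.pyGetD (edges.foldl (pvLiveStep level) acc) t 0 =
          PySem.List.pyGetD acc t 0 + pvCnt edges (fun pr => pvLiveP level pr && pr.2 == t) := by
  induction edges with
  | nil =>
    intro acc _ _
    refine ⟨rfl, fun t _ _ => ?_⟩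
    unfold pvCnt pvPairs
    simp
  | cons e es ih =>
    intro acc hge hlen
    obtain ⟨hlen2, hmem⟩ := hge e List.mem_cons_self
    match e, hlen2 with
    | [u, v], _ =>
      have hu := hmem u (by simp)
      have hv := hmem v (by simp)
      have hstep : (pvLiveStep level acc [u, v]).length = acc.length := pv_livestep_len level acc _
      obtain ⟨ihl, ihg⟩ := ih (pvLiveStep level acc [u, v])
        (fun e' he' => hge e' (List.mem_cons_of_mem _ he')) (by rw [hstep]; exact hlen)
      rw [List.foldl_cons]
      refine ⟨by rw [ihl, hstep], fun t h0 h1 => ?_⟩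
      rw [ihg t h0 h1, pv_cnt_cons]
      have hshape : ((((match ([u, v] : List Int) with
          | [u, v] => [(u, v), (v, u)] | _ => []) : List (Int × Int)).countP
            (fun pr => pvLiveP level pr && pr.2 == t)) : Int) =
          if pvLiveP level (u, v) then (if u = t then 1 else 0) + (if v = t then 1 else 0) else 0 :=
        pv_pair_countP_live level u v t
      rw [hshape]
      have hgate : pvLiveStep level acc [u, v] =
          if pvLiveP level (u, v) then pvDegStep acc [u, v] else acc := by
        unfold pvLiveStep pvLiveP pvDegStep
        rfl
      by_cases hl : pvLiveP level (u, v) = true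
      · rw [hgate, if_pos hl, if_pos hl,
          pv_degstep_get acc u v t (by omega) (by omega) (by omega) (by omega) h0 (by omega)]
        ring
      · simp only [Bool.not_eq_true] at hl
        rw [hgate, hl]
        simp only [Bool.false_eq_true, if_false]
        ring
theorem pv_inner_spec (n : Int) (sel : List Bool) (ns : List Int) (degS : Int → Int) :
    ∀ (deg nq : List Int),
    (n : Int) < deg.length → (n : Int) < sel.length → 0 ≤ n →
    (∀ t ∈ ns, 1 ≤ t ∧ t ≤ n) →
    (∀ t : Int, 1 ≤ t → t ≤ n → PySem.List.pyGetD sel t false = false →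
      PySem.List.pyGetD deg t 0 ≤ degS t) →
    (∀ t ∈ nq, (1 ≤ t ∧ t ≤ n) ∧ PySem.List.pyGetD sel t false = false ∧
      PySem.List.pyGetD deg t 0 ≤ 1 ∧ 2 ≤ degS t) →
    (∀ t : Int, 1 ≤ t → t ≤ n → PySem.List.pyGetD sel t false = false → t ∉ nq →
      ¬(PySem.List.pyGetD deg t 0 ≤ 1 ∧ 2 ≤ degS t)) →
    nq.Nodup →
    (ns.foldl (innerA sel) (deg, nq)).1.length = deg.length ∧
    (∀ t : Int, 0 ≤ t → t ≤ n →
      PySem.List.pyGetD (ns.foldl (innerA sel) (deg, nq)).1 t 0 =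
        PySem.List.pyGetD deg t 0 -
          (if PySem.List.pyGetD sel t false then 0 else (ns.count t : Int))) ∧
    (∀ t : Int, 1 ≤ t → t ≤ n → PySem.List.pyGetD sel t false = false →
      PySem.List.pyGetD (ns.foldl (innerA sel) (deg, nq)).1 t 0 ≤ degS t) ∧
    (∀ t ∈ (ns.foldl (innerA sel) (deg, nq)).2, (1 ≤ t ∧ t ≤ n) ∧
      PySem.List.pyGetD sel t false = false ∧
      PySem.List.pyGetD (ns.foldl (innerA sel) (deg, nq)).1 t 0 ≤ 1 ∧ 2 ≤ degS t) ∧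
    (∀ t : Int, 1 ≤ t → t ≤ n → PySem.List.pyGetD sel t false = false →
      t ∉ (ns.foldl (innerA sel) (deg, nq)).2 →
      ¬(PySem.List.pyGetD (ns.foldl (innerA sel) (deg, nq)).1 t 0 ≤ 1 ∧ 2 ≤ degS t)) ∧
    (ns.foldl (innerA sel) (deg, nq)).2.Nodup := by
  induction ns with
  | nil =>
    intro deg nq hdl hsl hn _ hmono hmem hcomp hnd
    refine ⟨rfl, fun t h0 h1 => ?_, hmono, hmem, hcomp, hnd⟩
    simp only [List.foldl_nil, List.count_nil]
    cases PySem.List.pyGetD sel t false <;> simp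
  | cons tid rest ih =>
    intro deg nq hdl hsl hn hns hmono hmem hcomp hnd
    have htid := hns tid List.mem_cons_self
    have hrest : ∀ t ∈ rest, 1 ≤ t ∧ t ≤ n := fun t ht => hns t (List.mem_cons_of_mem _ ht)
    rw [List.foldl_cons]
    by_cases hselt : PySem.List.pyGetD sel tid false = true
    · -- tid already selected: skip
      have hstep : innerA sel (deg, nq) tid = (deg, nq) := by
        unfold innerA
        rw [if_pos hselt]
      rw [hstep]
      obtain ⟨c1, c2, c3, c4, c5, c6⟩ := ih deg nq hdl hsl hn hrest hmono hmem hcomp hnd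
      refine ⟨c1, fun t h0 h1 => ?_, c3, c4, c5, c6⟩
      rw [c2 t h0 h1]
      by_cases hst : PySem.List.pyGetD sel t false = true
      · simp [hst]
      · have hst' : PySem.List.pyGetD sel t false = false := by simpa using hst
        have htne : ¬ (tid == t) = true := by
          intro h
          rw [eq_of_beq h] at hselt
          rw [hselt] at hst'
          exact absurd hst' (by simp)
        rw [hst']
        simp only [Bool.false_eq_true, if_false, List.count_cons, htne]
        simp
    · have hselt' : PySem.List.pyGetD sel tid false = false := by simpa using hselt
      set d := PySem.List.pyGetD deg tid 0 with hd
      set deg' := PySem.List.pySetD deg tid (d - 1) with hdeg'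
      have hdl' : (n : Int) < deg'.length := by
        rw [hdeg', PySem.List.length_pySetD]; exact hdl
      have hget' : ∀ t : Int, 0 ≤ t → t ≤ n →
          PySem.List.pyGetD deg' t 0 = if t = tid then d - 1 else PySem.List.pyGetD deg t 0 := by
        intro t h0 h1
        rw [hdeg', pv_getD_set deg tid t _ _ (by omega) (by omega) h0 (by omega)]
      have hstep : innerA sel (deg, nq) tid =
          if PySem.List.pyGetD deg' tid 0 == 1 then (deg', nq ++ [tid]) else (deg', nq) := by
        unfold innerA
        rw [if_neg (by rw [hselt']; simp)]
      have hdt' : PySem.List.pyGetD deg' tid 0 = d - 1 := by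
        rw [hget' tid (by omega) (by omega), if_pos rfl]
      have hmono' : ∀ t : Int, 1 ≤ t → t ≤ n → PySem.List.pyGetD sel t false = false →
          PySem.List.pyGetD deg' t 0 ≤ degS t := by
        intro t h0 h1 hsf
        rw [hget' t (by omega) h1]
        by_cases h : t = tid
        · subst h
          have := hmono t h0 h1 hsf
          simp only [if_pos rfl]
          omega
        · rw [if_neg h]
          exact hmono t h0 h1 hsf
      by_cases happ : (PySem.List.pyGetD deg' tid 0 == 1) = true
      · -- degree hit exactly 1: tid is appended
        have hd2 : d = 2 := by
          have h1 : d - 1 = 1 := by rw [← hdt']; exact beq_iff_eq.mp happ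
          omega
        have htid_notin : tid ∉ nq := by
          intro hin
          have := (hmem tid hin).2.2.1
          omega
        have hstep2 : innerA sel (deg, nq) tid = (deg', nq ++ [tid]) := by
          rw [hstep, if_pos happ]
        rw [hstep2]
        have hmem' : ∀ t ∈ nq ++ [tid], (1 ≤ t ∧ t ≤ n) ∧
            PySem.List.pyGetD sel t false = false ∧
            PySem.List.pyGetD deg' t 0 ≤ 1 ∧ 2 ≤ degS t := by
          intro t ht
          rcases List.mem_append.mp ht with h | h
          · obtain ⟨hb, hs, hdle, hgs⟩ := hmem t h
            have htne : t ≠ tid := by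
              intro he
              rw [he, ← hd] at hdle
              omega
            refine ⟨hb, hs, ?_, hgs⟩
            rw [hget' t (by omega) hb.2, if_neg htne]
            exact hdle
          · have he : t = tid := by simpa using h
            subst he
            refine ⟨htid, hselt', by rw [hdt']; omega, ?_⟩
            have := hmono t htid.1 htid.2 hselt'
            omega
        have hcomp' : ∀ t : Int, 1 ≤ t → t ≤ n → PySem.List.pyGetD sel t false = false →
            t ∉ nq ++ [tid] →
            ¬(PySem.List.pyGetD deg' t 0 ≤ 1 ∧ 2 ≤ degS t) := by
          intro t h0 h1 hsf hnin
          have htne : t ≠ tid := by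
            intro he
            exact hnin (by rw [he]; simp)
          rw [hget' t (by omega) h1, if_neg htne]
          exact hcomp t h0 h1 hsf (fun hin => hnin (List.mem_append.mpr (Or.inl hin)))
        have hnd' : (nq ++ [tid]).Nodup := by
          rw [List.nodup_append]
          refine ⟨hnd, List.nodup_singleton _, ?_⟩
          intro a ha b hb
          have hbt : b = tid := by simpa using hb
          subst hbt
          intro he
          exact htid_notin (he ▸ ha)
        obtain ⟨c1, c2, c3, c4, c5, c6⟩ := ih deg' (nq ++ [tid])
          hdl' hsl hn hrest hmono' hmem' hcomp' hnd'
        refine ⟨by rw [c1, hdeg', PySem.List.length_pySetD], fun t h0 h1 => ?_, c3, c4, c5, c6⟩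
        rw [c2 t h0 h1, hget' t h0 h1]
        by_cases hst : PySem.List.pyGetD sel t false = true
        · have htne : ¬ t = tid := by
            intro he
            rw [he] at hst
            rw [hst] at hselt'
            exact absurd hselt' (by simp)
          rw [if_neg htne]
          simp [hst]
        · have hst' : PySem.List.pyGetD sel t false = false := by simpa using hst
          rw [hst']
          simp only [Bool.false_eq_true, if_false, List.count_cons]
          by_cases he : t = tid
          · subst he
            rw [if_pos rfl]
            simp only [beq_self_eq_true, if_true]
            push_cast
            omega
          · rw [if_neg he]
            have : ¬ (tid == t) = true := fun h => he (eq_of_beq h).symm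
            simp only [this, Bool.false_eq_true, if_false]
            simp
      · -- no append
        have hne1 : ¬ d - 1 = 1 := by
          intro h
          exact happ (by rw [hdt']; exact beq_iff_eq.mpr h)
        have hstep2 : innerA sel (deg, nq) tid = (deg', nq) := by
          rw [hstep, if_neg happ]
        rw [hstep2]
        have hmem' : ∀ t ∈ nq, (1 ≤ t ∧ t ≤ n) ∧
            PySem.List.pyGetD sel t false = false ∧
            PySem.List.pyGetD deg' t 0 ≤ 1 ∧ 2 ≤ degS t := by
          intro t ht
          obtain ⟨hb, hs, hdle, hgs⟩ := hmem t ht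
          refine ⟨hb, hs, ?_, hgs⟩
          rw [hget' t (by omega) hb.2]
          by_cases he : t = tid
          · subst he
            rw [if_pos rfl, ← hd] at *
            omega
          · rw [if_neg he]
            exact hdle
        have hcomp' : ∀ t : Int, 1 ≤ t → t ≤ n → PySem.List.pyGetD sel t false = false →
            t ∉ nq →
            ¬(PySem.List.pyGetD deg' t 0 ≤ 1 ∧ 2 ≤ degS t) := by
          intro t h0 h1 hsf hnin
          rw [hget' t (by omega) h1]
          by_cases he : t = tid
          · subst he
            rw [if_pos rfl]
            rintro ⟨ha, hb⟩
            have hc := hcomp t h0 h1 hsf hnin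
            rw [← hd] at hc
            by_cases hdle : d ≤ 1
            · exact hc ⟨hdle, hb⟩
            · omega
          · rw [if_neg he]
            exact hcomp t h0 h1 hsf hnin
        obtain ⟨c1, c2, c3, c4, c5, c6⟩ := ih deg' nq hdl' hsl hn hrest hmono' hmem' hcomp' hnd
        refine ⟨by rw [c1, hdeg', PySem.List.length_pySetD], fun t h0 h1 => ?_, c3, c4, c5, c6⟩
        rw [c2 t h0 h1, hget' t h0 h1]
        by_cases hst : PySem.List.pyGetD sel t false = true
        · have htne : ¬ t = tid := by
            intro he
            rw [he] at hst
            rw [hst] at hselt'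
            exact absurd hselt' (by simp)
          rw [if_neg htne]
          simp [hst]
        · have hst' : PySem.List.pyGetD sel t false = false := by simpa using hst
          rw [hst']
          simp only [Bool.false_eq_true, if_false, List.count_cons]
          by_cases he : t = tid
          · subst he
            rw [if_pos rfl]
            simp only [beq_self_eq_true, if_true]
            push_cast
            omega
          · rw [if_neg he]
            have : ¬ (tid == t) = true := fun h => he (eq_of_beq h).symm
            simp only [this, Bool.false_eq_true, if_false]
            simp
theorem pv_count_filter_map (l : List (Int × Int)) (p t : Int) :
    (((l.filter (fun pr => pr.1 == p)).map (fun pr => pr.2)).count t) =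
      l.countP (fun pr => (pr.1 == p) && (pr.2 == t)) := by
  rw [List.count_eq_countP, List.countP_map, List.countP_filter]
  apply pv_countP_congr
  intro a _
  simp only [Function.comp]
  cases h1 : (a.1 == p) <;> cases h2 : (a.2 == t) <;> simp [h1, h2]

theorem pv_wave_spec (n : Int) (edges : List (List Int)) (d : PySem.Dict Int (List Int))
    (degS : Int → Int)
    (hadj : ∀ p : Int, d.getD p [] =
      ((pvPairs edges).filter (fun pr => pr.1 == p)).map (fun pr => pr.2))
    (hpb : ∀ pr ∈ pvPairs edges, (1 ≤ pr.1 ∧ pr.1 ≤ n) ∧ (1 ≤ pr.2 ∧ pr.2 ≤ n)) :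
    ∀ (q deg : List Int) (sel : List Bool) (count : Int) (nq : List Int),
    (n : Int) < deg.length → (n : Int) < sel.length → 0 ≤ n →
    q.Nodup →
    (∀ p ∈ q, (1 ≤ p ∧ p ≤ n) ∧ PySem.List.pyGetD sel p false = false ∧ degS p ≤ 1) →
    (∀ t : Int, 1 ≤ t → t ≤ n → PySem.List.pyGetD sel t false = false →
      PySem.List.pyGetD deg t 0 ≤ degS t) →
    (∀ t ∈ nq, (1 ≤ t ∧ t ≤ n) ∧ PySem.List.pyGetD sel t false = false ∧
      PySem.List.pyGetD deg t 0 ≤ 1 ∧ 2 ≤ degS t) →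
    (∀ t : Int, 1 ≤ t → t ≤ n → PySem.List.pyGetD sel t false = false → t ∉ nq →
      ¬(PySem.List.pyGetD deg t 0 ≤ 1 ∧ 2 ≤ degS t)) →
    nq.Nodup →
    (q.foldl (stepA d) ((deg, sel, count), nq)).1.1.length = deg.length ∧
    (q.foldl (stepA d) ((deg, sel, count), nq)).1.2.1.length = sel.length ∧
    (∀ t : Int, 0 ≤ t → t ≤ n →
      PySem.List.pyGetD (q.foldl (stepA d) ((deg, sel, count), nq)).1.2.1 t false =
        (PySem.List.pyGetD sel t false || q.contains t)) ∧
    (q.foldl (stepA d) ((deg, sel, count), nq)).1.2.2 = count + (q.length : Int) ∧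
    (∀ t : Int, 0 ≤ t → t ≤ n →
      PySem.List.pyGetD (q.foldl (stepA d) ((deg, sel, count), nq)).1.2.1 t false = false →
      PySem.List.pyGetD (q.foldl (stepA d) ((deg, sel, count), nq)).1.1 t 0 =
        PySem.List.pyGetD deg t 0 - pvCnt edges (fun pr => q.contains pr.1 && pr.2 == t)) ∧
    (∀ t : Int, 1 ≤ t → t ≤ n →
      PySem.List.pyGetD (q.foldl (stepA d) ((deg, sel, count), nq)).1.2.1 t false = false →
      PySem.List.pyGetD (q.foldl (stepA d) ((deg, sel, count), nq)).1.1 t 0 ≤ degS t) ∧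
    (∀ t ∈ (q.foldl (stepA d) ((deg, sel, count), nq)).2, (1 ≤ t ∧ t ≤ n) ∧
      PySem.List.pyGetD (q.foldl (stepA d) ((deg, sel, count), nq)).1.2.1 t false = false ∧
      PySem.List.pyGetD (q.foldl (stepA d) ((deg, sel, count), nq)).1.1 t 0 ≤ 1 ∧ 2 ≤ degS t) ∧
    (∀ t : Int, 1 ≤ t → t ≤ n →
      PySem.List.pyGetD (q.foldl (stepA d) ((deg, sel, count), nq)).1.2.1 t false = false →
      t ∉ (q.foldl (stepA d) ((deg, sel, count), nq)).2 →
      ¬(PySem.List.pyGetD (q.foldl (stepA d) ((deg, sel, count), nq)).1.1 t 0 ≤ 1 ∧ 2 ≤ degS t)) ∧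
    (q.foldl (stepA d) ((deg, sel, count), nq)).2.Nodup := by
  intro q
  induction q with
  | nil =>
    intro deg sel count nq hdl hsl hn _ _ hmono hmem hcomp hnd
    simp only [List.foldl_nil]
    refine ⟨by simp, by simp, fun t _ _ => by simp, by simp, fun t h0 h1 _ => ?_, hmono, hmem, hcomp, hnd⟩
    unfold pvCnt
    rw [pv_countP_congr _ _ (fun _ => false) (fun a _ => by simp), List.countP_false]
    simp
  | cons p q' ih =>
    intro deg sel count nq hdl hsl hn hqnd hq hmono hmem hcomp hnd
    have hp := hq p List.mem_cons_self
    have hpb1 : 1 ≤ p := hp.1.1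
    have hpb2 : p ≤ n := hp.1.2
    have hpnotq' : p ∉ q' := (List.nodup_cons.mp hqnd).1
    set sel1 := PySem.List.pySetD sel p true with hsel1
    have hsl1 : (n : Int) < sel1.length := by
      rw [hsel1, PySem.List.length_pySetD]; exact hsl
    have hget1 : ∀ t : Int, 0 ≤ t → t ≤ n →
        PySem.List.pyGetD sel1 t false = if t = p then true else PySem.List.pyGetD sel t false := by
      intro t h0 h1
      rw [hsel1, pv_getD_set sel p t _ _ (by omega) (by omega) h0 (by omega)]
    set ns := d.getD p [] with hns
    have hnsb : ∀ t ∈ ns, 1 ≤ t ∧ t ≤ n := by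
      intro t ht
      rw [hns, hadj] at ht
      obtain ⟨pr, hpr, hpr2⟩ := List.mem_map.mp ht
      have := hpb pr (List.mem_of_mem_filter hpr)
      rw [hpr2] at this
      exact this.2
    have hmono1 : ∀ t : Int, 1 ≤ t → t ≤ n → PySem.List.pyGetD sel1 t false = false →
        PySem.List.pyGetD deg t 0 ≤ degS t := by
      intro t h0 h1 hs
      rw [hget1 t (by omega) h1] at hs
      by_cases he : t = p
      · rw [if_pos he] at hs; exact absurd hs (by simp)
      · rw [if_neg he] at hs; exact hmono t h0 h1 hs
    have hmem1 : ∀ t ∈ nq, (1 ≤ t ∧ t ≤ n) ∧ PySem.List.pyGetD sel1 t false = false ∧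
        PySem.List.pyGetD deg t 0 ≤ 1 ∧ 2 ≤ degS t := by
      intro t ht
      obtain ⟨hb, hs, h1, h2⟩ := hmem t ht
      refine ⟨hb, ?_, h1, h2⟩
      rw [hget1 t (by omega) hb.2]
      have hne : t ≠ p := by
        intro he
        rw [he] at h2
        have := hp.2.2
        omega
      rw [if_neg hne]
      exact hs
    have hcomp1 : ∀ t : Int, 1 ≤ t → t ≤ n → PySem.List.pyGetD sel1 t false = false →
        t ∉ nq → ¬(PySem.List.pyGetD deg t 0 ≤ 1 ∧ 2 ≤ degS t) := by
      intro t h0 h1 hs hnin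
      rw [hget1 t (by omega) h1] at hs
      by_cases he : t = p
      · rw [if_pos he] at hs; exact absurd hs (by simp)
      · rw [if_neg he] at hs; exact hcomp t h0 h1 hs hnin
    obtain ⟨c1, c2, c3, c4, c5, c6⟩ :=
      pv_inner_spec n sel1 ns degS deg nq hdl hsl1 hn hnsb hmono1 hmem1 hcomp1 hnd
    set r1 := ns.foldl (innerA sel1) (deg, nq) with hr1
    have hstep : stepA d ((deg, sel, count), nq) p = ((r1.1, sel1, count + 1), r1.2) := rfl
    rw [List.foldl_cons, hstep]
    have hq' : ∀ p' ∈ q', (1 ≤ p' ∧ p' ≤ n) ∧ PySem.List.pyGetD sel1 p' false = false ∧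
        degS p' ≤ 1 := by
      intro p' hp'
      obtain ⟨hb, hs, hle⟩ := hq p' (List.mem_cons_of_mem _ hp')
      refine ⟨hb, ?_, hle⟩
      rw [hget1 p' (by omega) hb.2, if_neg (by intro he; exact hpnotq' (he ▸ hp'))]
      exact hs
    obtain ⟨w1, w2, w3, w4, w5, w6, w7, w8, w9⟩ := ih r1.1 sel1 (count + 1) r1.2
      (by rw [c1]; exact hdl) hsl1 hn (List.nodup_cons.mp hqnd).2 hq' c3 c4 c5 c6
    refine ⟨by rw [w1, c1], by rw [w2, hsel1, PySem.List.length_pySetD], ?_, ?_, ?_, w6, w7, w8, w9⟩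
    · -- selected: old or popped
      intro t h0 h1
      rw [w3 t h0 h1, hget1 t h0 h1]
      by_cases he : t = p
      · subst he
        simp
      · have hbe : (t == p) = false := by simp [he]
        simp [List.contains_cons, he, hbe]
    · -- count
      rw [w4]
      push_cast [List.length_cons]
      ring
    · -- degree accounting
      intro t h0 h1 hsf
      have hs1 : PySem.List.pyGetD sel1 t false = false := by
        have := w3 t h0 h1
        rw [hsf] at this
        cases hv : PySem.List.pyGetD sel1 t false
        · rfl
        · rw [hv] at this; simp at this
      have hnotq : q'.contains t = false := by
        have := w3 t h0 h1
        rw [hsf] at this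
        cases hv : q'.contains t
        · rfl
        · rw [hv] at this; simp at this
      rw [w5 t h0 h1 hsf, c2 t h0 h1, hs1]
      simp only [Bool.false_eq_true, if_false]
      have htnep : t ≠ p := by
        intro he
        rw [hget1 t h0 h1, if_pos he] at hs1
        exact absurd hs1 (by simp)
      -- ns.count t = countP pairs (fst == p && snd == t)
      have hcnt : (ns.count t : Int) =
          ((pvPairs edges).countP (fun pr => (pr.1 == p) && (pr.2 == t)) : Int) := by
        rw [hns, hadj, pv_count_filter_map]
      rw [hcnt]
      unfold pvCnt
      have hsplit : (pvPairs edges).countP (fun pr => (p :: q').contains pr.1 && pr.2 == t) =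
          (pvPairs edges).countP (fun pr => (pr.1 == p) && (pr.2 == t)) +
          (pvPairs edges).countP (fun pr => q'.contains pr.1 && (pr.2 == t)) := by
        rw [← pv_countP_or _ _ _ ?hdis]
        · apply pv_countP_congr
          intro a _
          have hcq : q'.contains p = false := by simpa using hpnotq'
          by_cases he : a.1 = p
          · rw [he]
            simp [hcq]
          · have hbe : (a.1 == p) = false := by simp [he]
            simp [List.contains_cons, he, hbe]
        case hdis =>
          intro a _ h
          obtain ⟨ha1, ha2⟩ := h
          simp only [Bool.and_eq_true] at ha1 ha2
          have he : a.1 = p := eq_of_beq ha1.1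
          rw [he] at ha2
          exact hpnotq' (by simpa using ha2.1)
      rw [hsplit]
      push_cast
      ring
-- removed-edge-endpoint count (the decrements A has applied so far, in B's terms)
def pvE (edges : List (List Int)) (level : List Int) (t : Int) : Int :=
  pvCnt edges (fun pr => (!(PySem.List.pyGetD level pr.1 0 == -1)) && (pr.2 == t))

-- number of removed nodes among 1..n
def pvRmCnt (n : Int) (level : List Int) : Int :=
  (((PySem.List.pyRange 1 (n+1) 1).countP (fun p => !(PySem.List.pyGetD level p 0 == -1))) : Int)

-- number of live nodes among 1..n (the fuel measure)
def pvLiveCnt (n : Int) (level : List Int) : Nat :=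
  (PySem.List.pyRange 1 (n+1) 1).countP (fun p => PySem.List.pyGetD level p 0 == -1)

-- live degree of a live node = its full degree minus edges into removed nodes
theorem pv_live_eq (edges : List (List Int)) (level : List Int) (t : Int)
    (ht : PySem.List.pyGetD level t 0 = -1) :
    pvCnt edges (fun pr => pvLiveP level pr && pr.2 == t) = pvDeg0 edges t - pvE edges level t := by
  unfold pvCnt pvDeg0 pvE pvCnt
  have h1 : (pvPairs edges).countP (fun pr => pvLiveP level pr && pr.2 == t) =
      (pvPairs edges).countP (fun pr => (pr.2 == t) && !(!(PySem.List.pyGetD level pr.1 0 == -1))) := by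
    apply pv_countP_congr
    intro a _
    unfold pvLiveP
    by_cases h2 : a.2 = t
    · have hb2 : (a.2 == t) = true := beq_iff_eq.mpr h2
      have hlt : (PySem.List.pyGetD level a.2 0 == -1) = true := by
        rw [h2]; exact beq_iff_eq.mpr ht
      rw [hb2, hlt]
      cases h1 : (PySem.List.pyGetD level a.1 0 == -1) <;> simp [h1]
    · have hb2 : (a.2 == t) = false := by simp [h2]
      rw [hb2]
      simp
  rw [h1]
  have h2 := pv_countP_split (pvPairs edges) (fun pr => pr.2 == t)
    (fun pr => !(PySem.List.pyGetD level pr.1 0 == -1))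
  have h3 : ∀ l' : List (Int × Int),
      l'.countP (fun pr => (pr.2 == t) && !(PySem.List.pyGetD level pr.1 0 == -1)) =
      l'.countP (fun pr => (!(PySem.List.pyGetD level pr.1 0 == -1)) && (pr.2 == t)) := by
    intro l'
    apply pv_countP_congr
    intro a _
    cases hx : (a.2 == t) <;> cases hy : (PySem.List.pyGetD level a.1 0 == -1) <;> simp [hx, hy]
  rw [h3] at h2
  omega

-- counting members of a nodup sub-list inside a nodup list
theorem pv_countP_mem (l w : List Int) (hl : l.Nodup) (hw : w.Nodup)
    (hsub : ∀ t ∈ w, t ∈ l) :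
    l.countP (fun t => decide (t ∈ w)) = w.length := by
  rw [List.countP_eq_length_filter]
  have hfn : (l.filter (fun t => decide (t ∈ w))).Nodup := List.Nodup.filter _ hl
  have hperm : List.Perm (l.filter (fun t => decide (t ∈ w))) w := by
    rw [List.perm_ext_iff_of_nodup hfn hw]
    intro a
    simp only [List.mem_filter, decide_eq_true_eq]
    constructor
    · rintro ⟨_, h⟩; exact h
    · intro h; exact ⟨hsub a h, h⟩
  exact hperm.length_eq

-- effect of Source B's 'for p in wave: level[p] = lvl'
theorem pv_lvlset_spec (n lvl : Int) (w : List Int) :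
    ∀ (level : List Int), (n : Int) < level.length → 0 ≤ n →
    (∀ p ∈ w, 1 ≤ p ∧ p ≤ n) →
    (w.foldl (fun l p => PySem.List.pySetD l p lvl) level).length = level.length ∧
    ∀ t : Int, 0 ≤ t → t ≤ n →
      PySem.List.pyGetD (w.foldl (fun l p => PySem.List.pySetD l p lvl) level) t 0 =
        if t ∈ w then lvl else PySem.List.pyGetD level t 0 := by
  induction w with
  | nil =>
    intro level hlen hn _
    refine ⟨rfl, fun t _ _ => by simp⟩
  | cons p w' ih =>
    intro level hlen hn hb
    have hp := hb p List.mem_cons_self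
    set level1 := PySem.List.pySetD level p lvl with hlevel1
    have hlen1 : level1.length = level.length := by
      rw [hlevel1, PySem.List.length_pySetD]
    obtain ⟨ihl, ihg⟩ := ih level1 (by rw [hlen1]; exact hlen) hn
      (fun p' hp' => hb p' (List.mem_cons_of_mem _ hp'))
    rw [List.foldl_cons]
    refine ⟨by rw [ihl, hlen1], fun t h0 h1 => ?_⟩
    rw [ihg t h0 h1, hlevel1, pv_getD_set level p t _ _ (by omega) (by omega) h0 (by omega)]
    by_cases hw' : t ∈ w'
    · rw [if_pos hw', if_pos (List.mem_cons_of_mem _ hw')]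
    · rw [if_neg hw']
      by_cases he : t = p
      · rw [if_pos he, if_pos (by rw [he]; exact List.mem_cons_self)]
      · rw [if_neg he, if_neg (by intro h; rcases List.mem_cons.mp h with h | h; exact he h; exact hw' h)]
def pvOutA (x : Int) (r : List Bool × Int) : String :=
  if PySem.List.pyGetD r.1 x false then
    if PySem.Int.mod r.2 2 == 0 then "Pyrmont" else "Xiaoyo"
  else "Draw"

def pvOutB (n x : Int) (levelF : List Int) : String :=
  if PySem.List.pyGetD levelF x (-1) == -1 then "Draw"
  else
    if PySem.Int.mod (((PySem.List.pyRange 1 (n+1) 1).filter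
        (fun p => (PySem.List.pyGetD levelF p 0 != -1) &&
          decide (PySem.List.pyGetD levelF p 0 ≤ PySem.List.pyGetD levelF x (-1)))).length : Int) 2 == 0
    then "Pyrmont" else "Xiaoyo"

-- after a round, existing level entries persist and new ones are ≥ the current lvl
theorem pv_rounds_post (n : Int) (edges : List (List Int)) (degFix : List Int) :
    ∀ (fuel : Nat) (level : List Int) (lvl : Int),
    (n : Int) < level.length → 0 ≤ n → 0 ≤ lvl →
    (roundsB n edges degFix fuel level lvl).length = level.length ∧
    ∀ t : Int, 0 ≤ t → t ≤ n →
      PySem.List.pyGetD (roundsB n edges degFix fuel level lvl) t 0 = PySem.List.pyGetD level t 0 ∨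
      (PySem.List.pyGetD level t 0 = -1 ∧
        lvl ≤ PySem.List.pyGetD (roundsB n edges degFix fuel level lvl) t 0) := by
  intro fuel
  induction fuel with
  | zero =>
    intro level lvl hlen hn _
    exact ⟨rfl, fun t _ _ => Or.inl rfl⟩
  | succ fuel ih =>
    intro level lvl hlen hn hlvl
    set live := liveB n edges level with hlive
    set wave := (PySem.List.pyRange 1 (n+1) 1).filter
      (fun p => (PySem.List.pyGetD level p 0 == -1) &&
        decide (PySem.List.pyGetD live p 0 ≤ 1) && decide (1 ≤ PySem.List.pyGetD degFix p 0)) with hwave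
    have hunfold : roundsB n edges degFix (fuel+1) level lvl =
        if wave.isEmpty then level
        else roundsB n edges degFix fuel
          (wave.foldl (fun l p => PySem.List.pySetD l p lvl) level) (lvl+1) := rfl
    rw [hunfold]
    by_cases hwe : wave.isEmpty
    · rw [if_pos hwe]
      exact ⟨rfl, fun t _ _ => Or.inl rfl⟩
    · rw [if_neg hwe]
      have hwb : ∀ p ∈ wave, 1 ≤ p ∧ p ≤ n := by
        intro p hp
        have hm := List.mem_of_mem_filter hp
        have := PySem.List.mem_pyRange_one.mp hm
        omega
      have hwlive : ∀ p ∈ wave, PySem.List.pyGetD level p 0 = -1 := by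
        intro p hp
        have := List.of_mem_filter hp
        simp only [Bool.and_eq_true, beq_iff_eq] at this
        exact this.1.1
      set level1 := wave.foldl (fun l p => PySem.List.pySetD l p lvl) level with hlevel1
      obtain ⟨hsl, hsg⟩ := pv_lvlset_spec n lvl wave level hlen hn hwb
      rw [← hlevel1] at hsl hsg
      obtain ⟨ihl, ihg⟩ := ih level1 (lvl+1) (by rw [hsl]; exact hlen) hn (by omega)
      refine ⟨by rw [ihl, hsl], fun t h0 h1 => ?_⟩
      rcases ihg t h0 h1 with h | h
      · rw [h, hsg t h0 h1]
        by_cases hw : t ∈ wave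
        · exact Or.inr ⟨hwlive t hw, by rw [if_pos hw]⟩
        · rw [if_neg hw]
          exact Or.inl rfl
      · obtain ⟨h1', h2'⟩ := h
        rw [hsg t h0 h1] at h1'
        by_cases hw : t ∈ wave
        · rw [if_pos hw] at h1'
          omega
        · rw [if_neg hw] at h1'
          exact Or.inr ⟨h1', by omega⟩
theorem pv_loop (n x x' : Int) (edges : List (List Int)) (d : PySem.Dict Int (List Int))
    (degFix : List Int)
    (hn : 0 ≤ n) (hx'0 : 0 ≤ x') (hx'n : x' ≤ n)
    (hge : ∀ e ∈ edges, e.length = 2 ∧ ∀ s ∈ e, 1 ≤ s ∧ s ≤ n)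
    (hadj : ∀ p : Int, d.getD p [] =
      ((pvPairs edges).filter (fun pr => pr.1 == p)).map (fun pr => pr.2))
    (hpb : ∀ pr ∈ pvPairs edges, (1 ≤ pr.1 ∧ pr.1 ≤ n) ∧ (1 ≤ pr.2 ∧ pr.2 ≤ n))
    (hdegB : ∀ p : Int, 0 ≤ p → p ≤ n → PySem.List.pyGetD degFix p 0 = pvDeg0 edges p)
    (hxb : ∀ l : List Bool, l.length = (n+1).toNat →
      PySem.List.pyGetD l x false = PySem.List.pyGetD l x' false)
    (hxi : ∀ l : List Int, l.length = (n+1).toNat →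
      PySem.List.pyGetD l x (-1) = PySem.List.pyGetD l x' (-1)) :
    ∀ (fuelB fuelA : Nat) (level deg : List Int) (sel : List Bool) (count lvl : Int)
      (q : List Int),
    fuelB ≤ fuelA →
    pvLiveCnt n level < fuelB →
    level.length = (n+1).toNat → deg.length = (n+1).toNat → sel.length = (n+1).toNat →
    0 ≤ lvl →
    (∀ t : Int, 0 ≤ t → t ≤ n →
      PySem.List.pyGetD sel t false = !(PySem.List.pyGetD level t 0 == -1)) →
    (∀ t : Int, 0 ≤ t → t ≤ n → PySem.List.pyGetD level t 0 = -1 ∨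
      (0 ≤ PySem.List.pyGetD level t 0 ∧ PySem.List.pyGetD level t 0 < lvl)) →
    (∀ t : Int, 1 ≤ t → t ≤ n → PySem.List.pyGetD level t 0 = -1 →
      PySem.List.pyGetD deg t 0 = pvDeg0 edges t - pvE edges level t) →
    q.Nodup →
    (∀ p ∈ q, (1 ≤ p ∧ p ≤ n) ∧ PySem.List.pyGetD level p 0 = -1 ∧
      PySem.List.pyGetD deg p 0 ≤ 1 ∧ 1 ≤ pvDeg0 edges p) →
    (∀ t : Int, 1 ≤ t → t ≤ n → PySem.List.pyGetD level t 0 = -1 → t ∉ q →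
      ¬(PySem.List.pyGetD deg t 0 ≤ 1 ∧ 1 ≤ pvDeg0 edges t)) →
    count = pvRmCnt n level →
    PySem.List.pyGetD level x' 0 = -1 →
    pvOutA x (loopA d x fuelA q (deg, sel, count)) =
      pvOutB n x (roundsB n edges degFix fuelB level lvl) := by
  intro fuelB
  induction fuelB with
  | zero =>
    intro fuelA level deg sel count lvl q _ hfl _ _ _ _ _ _ _ _ _ _ _ _
    omega
  | succ fuelB ih =>
    intro fuelA level deg sel count lvl q hfa hfl hll hdl hsl hlvl hI2 hI3 hI4 hqnd hI5 hI6 hI7 hlx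
    match fuelA, hfa with
    | fuelA + 1, hfa =>
    have hlen' : (n : Int) < level.length := by rw [hll]; omega
    have hdeg' : (n : Int) < deg.length := by rw [hdl]; omega
    have hsel' : (n : Int) < sel.length := by rw [hsl]; omega
    have hzl : (n : Int) < ((PySem.List.pyRange 0 (n+1) 1).map (fun _ => (0:Int))).length := by
      rw [List.length_map, PySem.List.length_pyRange_one]
      omega
    -- B's recomputed live degrees agree with A's current degree array on live nodes
    obtain ⟨hliveL, hliveG⟩ := pv_liveF_spec n edges level
      ((PySem.List.pyRange 0 (n+1) 1).map (fun _ => (0:Int))) hge hzl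
    have hliveeq : ∀ p : Int, 1 ≤ p → p ≤ n → PySem.List.pyGetD level p 0 = -1 →
        PySem.List.pyGetD (liveB n edges level) p 0 = PySem.List.pyGetD deg p 0 := by
      intro p h0 h1 hl
      rw [pv_liveB_eq, hliveG p (by omega) h1,
        PySem.List.pyGetD_map_pyRange_of_nonneg _ _ _ _ (by omega) (by omega),
        pv_live_eq edges level p hl, hI4 p h0 h1 hl]
      ring
    set wave := (PySem.List.pyRange 1 (n+1) 1).filter
      (fun p => (PySem.List.pyGetD level p 0 == -1) &&
        decide (PySem.List.pyGetD (liveB n edges level) p 0 ≤ 1) &&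
        decide (1 ≤ PySem.List.pyGetD degFix p 0)) with hwave
    have hwmem : ∀ p : Int, p ∈ wave ↔ p ∈ q := by
      intro p
      constructor
      · intro hp
        have hrange := PySem.List.mem_pyRange_one.mp (List.mem_of_mem_filter hp)
        have hpred := List.of_mem_filter hp
        simp only [Bool.and_eq_true, beq_iff_eq, decide_eq_true_eq] at hpred
        obtain ⟨⟨hlvp, hlivep⟩, hdegp⟩ := hpred
        have h0 : 1 ≤ p := hrange.1
        have h1 : p ≤ n := by omega
        rw [hliveeq p h0 h1 hlvp] at hlivep
        rw [hdegB p (by omega) h1] at hdegp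
        by_contra hnq
        exact hI6 p h0 h1 hlvp hnq ⟨hlivep, hdegp⟩
      · intro hp
        obtain ⟨⟨h0, h1⟩, hlvp, hdlep, hd0p⟩ := hI5 p hp
        apply List.mem_filter.mpr
        refine ⟨PySem.List.mem_pyRange_one.mpr ⟨h0, by omega⟩, ?_⟩
        simp only [Bool.and_eq_true, beq_iff_eq, decide_eq_true_eq]
        refine ⟨⟨hlvp, ?_⟩, ?_⟩
        · rw [hliveeq p h0 h1 hlvp]; exact hdlep
        · rw [hdegB p (by omega) h1]; exact hd0p
    have hwnd : wave.Nodup := List.Nodup.filter _ (PySem.List.nodup_pyRange_one _ _)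
    have hwperm : List.Perm wave q := (List.perm_ext_iff_of_nodup hwnd hqnd).mpr hwmem
    have hwlen : wave.length = q.length := hwperm.length_eq
    have hwq : wave.isEmpty = q.isEmpty := by
      cases hq0 : q.isEmpty
      · have : q.length ≠ 0 := by
          intro h
          rw [List.length_eq_zero_iff.mp h] at hq0
          simp at hq0
        have : wave.length ≠ 0 := by omega
        cases hw0 : wave.isEmpty
        · rfl
        · rw [List.isEmpty_iff.mp hw0] at this
          simp at this
      · have hq' : q = [] := List.isEmpty_iff.mp hq0
        have : wave.length = 0 := by rw [hwlen, hq']; rfl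
        rw [List.length_eq_zero_iff.mp this]
        rfl
    have hunfoldB : roundsB n edges degFix (fuelB+1) level lvl =
        if wave.isEmpty then level
        else roundsB n edges degFix fuelB
          (wave.foldl (fun l p => PySem.List.pySetD l p lvl) level) (lvl+1) := rfl
    by_cases hq0 : q.isEmpty = true
    · -- queue empty: A stops with selected[x] false, B's fixpoint is reached
      have hunfoldA : loopA d x (fuelA+1) q (deg, sel, count) = (sel, count) := by
        simp only [loopA, hq0, if_true]
      rw [hunfoldA, hunfoldB, if_pos (by rw [hwq]; exact hq0)]
      unfold pvOutA pvOutB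
      have hsx : PySem.List.pyGetD sel x false = false := by
        rw [hxb sel hsl, hI2 x' hx'0 hx'n, hlx]
        simp
      have hlvlx : PySem.List.pyGetD level x (-1) = -1 := by
        rw [hxi level hll, pv_getD_dflt level x' (-1) 0 hx'0 (by omega)]
        exact hlx
      rw [hsx, hlvlx]
      simp
    · -- a real wave
      have hqne : q ≠ [] := by
        intro h
        rw [h] at hq0
        simp at hq0
      have hqlen1 : 1 ≤ q.length := List.length_pos_of_ne_nil hqne
      obtain ⟨w1, w2, w3, w4, w5, w6, w7, w8, w9⟩ :=
        pv_wave_spec n edges d (fun t => PySem.List.pyGetD deg t 0) hadj hpb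
          q deg sel count [] hdeg' hsel' hn hqnd
          (fun p hp => ⟨(hI5 p hp).1, by
            rw [hI2 p (by have := (hI5 p hp).1; omega) (hI5 p hp).1.2, (hI5 p hp).2.1]
            simp, (hI5 p hp).2.2.1⟩)
          (fun t _ _ _ => le_refl _)
          (fun t ht => absurd ht (List.not_mem_nil))
          (fun t _ _ _ _ h => by
            obtain ⟨h1, h2⟩ := h
            change 2 ≤ PySem.List.pyGetD deg t 0 at h2
            omega)
          List.nodup_nil
      set r := q.foldl (stepA d) ((deg, sel, count), []) with hr
      have hunfoldA : loopA d x (fuelA+1) q (deg, sel, count) =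
          if PySem.List.pyGetD r.1.2.1 x false then (r.1.2.1, r.1.2.2)
          else loopA d x fuelA r.2 r.1 := by
        simp only [loopA, hq0]
        rfl
      have hwb : ∀ p ∈ wave, 1 ≤ p ∧ p ≤ n := by
        intro p hp
        have := PySem.List.mem_pyRange_one.mp (List.mem_of_mem_filter hp)
        omega
      obtain ⟨hs1len, hs1get⟩ := pv_lvlset_spec n lvl wave level hlen' hn hwb
      set level1 := wave.foldl (fun l p => PySem.List.pySetD l p lvl) level with hlevel1
      have hlv1 : ∀ t : Int, 0 ≤ t → t ≤ n →
          PySem.List.pyGetD level1 t 0 = if t ∈ q then lvl else PySem.List.pyGetD level t 0 := by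
        intro t h0 h1
        rw [hs1get t h0 h1]
        by_cases hm : t ∈ q
        · rw [if_pos ((hwmem t).mpr hm), if_pos hm]
        · rw [if_neg (fun h => hm ((hwmem t).mp h)), if_neg hm]
      have hcontains : ∀ t : Int, q.contains t = decide (t ∈ q) := by
        intro t
        cases hm : q.contains t
        · have : t ∉ q := by simpa using hm
          simp [this]
        · have : t ∈ q := by simpa using hm
          simp [this]
      have hI2' : ∀ t : Int, 0 ≤ t → t ≤ n →
          PySem.List.pyGetD r.1.2.1 t false = !(PySem.List.pyGetD level1 t 0 == -1) := by
        intro t h0 h1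
        rw [w3 t h0 h1, hlv1 t h0 h1, hcontains t]
        by_cases hm : t ∈ q
        · have hne : ¬ (lvl == -1) = true := by
            intro h
            have := beq_iff_eq.mp h
            omega
          simp [hm, hne]
        · simp [hm, hI2 t h0 h1]
      -- pvE additivity over this wave
      have hE' : ∀ t : Int, pvE edges level1 t =
          pvE edges level t + pvCnt edges (fun pr => q.contains pr.1 && pr.2 == t) := by
        intro t
        unfold pvE pvCnt
        have hcg : (pvPairs edges).countP
            (fun pr => (!(PySem.List.pyGetD level1 pr.1 0 == -1)) && (pr.2 == t)) =
            (pvPairs edges).countP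
            (fun pr => ((!(PySem.List.pyGetD level pr.1 0 == -1)) && (pr.2 == t)) ||
              (q.contains pr.1 && (pr.2 == t))) := by
          apply pv_countP_congr
          intro a ha
          have hb := (hpb a ha).1
          rw [hlv1 a.1 (by omega) hb.2, hcontains a.1]
          by_cases hm : a.1 ∈ q
          · have hlva : PySem.List.pyGetD level a.1 0 = -1 := (hI5 a.1 hm).2.1
            have hne : ¬ (lvl == -1) = true := by
              intro h
              have := beq_iff_eq.mp h
              omega
            simp [hm, hne, hlva]
          · simp [hm]
        rw [hcg, pv_countP_or]
        · push_cast
          ring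
        · intro a _ h
          obtain ⟨h1, h2⟩ := h
          simp only [Bool.and_eq_true] at h1 h2
          rw [hcontains a.1] at h2
          have hm : a.1 ∈ q := by simpa using h2.1
          have := (hI5 a.1 hm).2.1
          rw [this] at h1
          simp at h1
      have hE0 : ∀ t : Int, 0 ≤ pvE edges level t := by
        intro t
        unfold pvE pvCnt
        positivity
      have hI4' : ∀ t : Int, 1 ≤ t → t ≤ n → PySem.List.pyGetD level1 t 0 = -1 →
          PySem.List.pyGetD r.1.1 t 0 = pvDeg0 edges t - pvE edges level1 t := by
        intro t h0 h1 hl1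
        have hnq : t ∉ q := by
          intro hm
          rw [hlv1 t (by omega) h1, if_pos hm] at hl1
          omega
        have hlv : PySem.List.pyGetD level t 0 = -1 := by
          rw [hlv1 t (by omega) h1, if_neg hnq] at hl1
          exact hl1
        have hsf : PySem.List.pyGetD r.1.2.1 t false = false := by
          rw [hI2' t (by omega) h1, hl1]
          simp
        rw [w5 t (by omega) h1 hsf, hI4 t h0 h1 hlv, hE' t]
        ring
      -- removed count grows by the wave size
      have hrange_nodup := PySem.List.nodup_pyRange_one 1 (n+1)
      have hqsub : ∀ t ∈ q, t ∈ PySem.List.pyRange 1 (n+1) 1 := by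
        intro t ht
        exact PySem.List.mem_pyRange_one.mpr ⟨(hI5 t ht).1.1, by have := (hI5 t ht).1.2; omega⟩
      have hcntq : (PySem.List.pyRange 1 (n+1) 1).countP (fun t => decide (t ∈ q)) = q.length :=
        pv_countP_mem _ q hrange_nodup hqnd hqsub
      have hRm' : pvRmCnt n level1 = pvRmCnt n level + (q.length : Int) := by
        unfold pvRmCnt
        have hcg : (PySem.List.pyRange 1 (n+1) 1).countP
            (fun p => !(PySem.List.pyGetD level1 p 0 == -1)) =
            (PySem.List.pyRange 1 (n+1) 1).countP
            (fun p => (!(PySem.List.pyGetD level p 0 == -1)) || decide (p ∈ q)) := by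
          apply pv_countP_congr
          intro p hp
          have hb := PySem.List.mem_pyRange_one.mp hp
          rw [hlv1 p (by omega) (by omega)]
          by_cases hm : p ∈ q
          · have hlva : PySem.List.pyGetD level p 0 = -1 := (hI5 p hm).2.1
            have hne : ¬ (lvl == -1) = true := by
              intro h
              have := beq_iff_eq.mp h
              omega
            simp [hm, hne, hlva]
          · simp [hm]
        rw [hcg, pv_countP_or, hcntq]
        · push_cast
          ring
        · intro p _ h
          obtain ⟨h1, h2⟩ := h
          have hm : p ∈ q := by simpa using h2
          have := (hI5 p hm).2.1
          rw [this] at h1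
          simp at h1
      have hLive' : pvLiveCnt n level1 + q.length = pvLiveCnt n level := by
        unfold pvLiveCnt
        have hcg : (PySem.List.pyRange 1 (n+1) 1).countP
            (fun p => PySem.List.pyGetD level1 p 0 == -1) =
            (PySem.List.pyRange 1 (n+1) 1).countP
            (fun p => (PySem.List.pyGetD level p 0 == -1) && !(decide (p ∈ q))) := by
          apply pv_countP_congr
          intro p hp
          have hb := PySem.List.mem_pyRange_one.mp hp
          rw [hlv1 p (by omega) (by omega)]
          by_cases hm : p ∈ q
          · have hne : (lvl == -1) = false := by
              simp only [beq_eq_false_iff_ne, ne_eq]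
              omega
            simp [hm, hne]
          · simp [hm]
        rw [hcg]
        have hsplit := pv_countP_split (PySem.List.pyRange 1 (n+1) 1)
          (fun p => PySem.List.pyGetD level p 0 == -1) (fun p => decide (p ∈ q))
        have hleft : (PySem.List.pyRange 1 (n+1) 1).countP
            (fun p => (PySem.List.pyGetD level p 0 == -1) && decide (p ∈ q)) =
            (PySem.List.pyRange 1 (n+1) 1).countP (fun p => decide (p ∈ q)) := by
          apply pv_countP_congr
          intro p _
          by_cases hm : p ∈ q
          · have := (hI5 p hm).2.1
            simp [hm, this]
          · simp [hm]
        rw [hleft, hcntq] at hsplit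
        omega
      -- the break test is membership of x' in this wave
      have hrsel_len : r.1.2.1.length = (n+1).toNat := by rw [w2, hsl]
      have hbx : PySem.List.pyGetD r.1.2.1 x false = decide (x' ∈ q) := by
        rw [hxb _ hrsel_len, w3 x' hx'0 hx'n, hcontains x']
        rw [hI2 x' hx'0 hx'n, hlx]
        simp
      have hwne : ¬ wave.isEmpty = true := by rw [hwq]; exact hq0
      rw [hunfoldA, hunfoldB, if_neg hwne]
      by_cases hxq : x' ∈ q
      · -- A breaks after this wave
        have hbxt : PySem.List.pyGetD r.1.2.1 x false = true := by rw [hbx]; simp [hxq]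
        rw [if_pos hbxt]
        obtain ⟨hplen, hpost⟩ := pv_rounds_post n edges degFix fuelB level1 (lvl+1)
          (by rw [hs1len]; exact hlen') hn (by omega)
        set levelF := roundsB n edges degFix fuelB level1 (lvl+1) with hlevelF
        have hFlen : levelF.length = (n+1).toNat := by rw [hplen, hs1len, hll]
        have hlv1x : PySem.List.pyGetD level1 x' 0 = lvl := by
          rw [hlv1 x' hx'0 hx'n, if_pos hxq]
        have hFx : PySem.List.pyGetD levelF x' 0 = lvl := by
          rcases hpost x' hx'0 hx'n with h | h
          · rw [h, hlv1x]
          · rw [hlv1x] at h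
            omega
        unfold pvOutA pvOutB
        have hFxneg : PySem.List.pyGetD levelF x (-1) = lvl := by
          rw [hxi levelF hFlen, pv_getD_dflt levelF x' (-1) 0 hx'0 (by rw [hFlen]; omega)]
          exact hFx
        have hlne : (lvl == -1) = false := by
          simp only [beq_eq_false_iff_ne, ne_eq]
          omega
        rw [hFxneg, hlne]
        simp only [Bool.false_eq_true, if_false, if_true]
        -- the two counts agree
        have hcnteq : ((((PySem.List.pyRange 1 (n+1) 1).filter
            (fun p => (PySem.List.pyGetD levelF p 0 != -1) &&
              decide (PySem.List.pyGetD levelF p 0 ≤ lvl))).length : Int)) =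
            r.1.2.2 := by
          rw [w4, hI7, ← List.countP_eq_length_filter]
          have hcg : (PySem.List.pyRange 1 (n+1) 1).countP
              (fun p => (PySem.List.pyGetD levelF p 0 != -1) &&
                decide (PySem.List.pyGetD levelF p 0 ≤ lvl)) =
              (PySem.List.pyRange 1 (n+1) 1).countP
              (fun p => !(PySem.List.pyGetD level1 p 0 == -1)) := by
            apply pv_countP_congr
            intro p hp
            have hb := PySem.List.mem_pyRange_one.mp hp
            rcases hpost p (by omega) (by omega) with h | h
            · rw [h]
              by_cases hrm : PySem.List.pyGetD level1 p 0 = -1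
              · simp [bne, hrm]
              · -- removed at level < lvl+1
                have hlt : PySem.List.pyGetD level1 p 0 ≤ lvl := by
                  rw [hlv1 p (by omega) (by omega)] at hrm ⊢
                  by_cases hm : p ∈ q
                  · rw [if_pos hm]
                  · rw [if_neg hm] at hrm ⊢
                    rcases hI3 p (by omega) (by omega) with h' | h'
                    · exact absurd h' hrm
                    · omega
                simp [bne, hrm, hlt]
            · obtain ⟨h1, h2⟩ := h
              have hgt : ¬ (PySem.List.pyGetD levelF p 0 ≤ lvl) := by omega
              simp [bne, h1, hgt]
          rw [hcg]
          have : ((PySem.List.pyRange 1 (n+1) 1).countP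
              (fun p => !(PySem.List.pyGetD level1 p 0 == -1)) : Int) = pvRmCnt n level1 := rfl
          rw [this, hRm']
        rw [hcnteq, hbxt]
        simp
      · -- x' not selected yet: both continue
        have hbxf : ¬ PySem.List.pyGetD r.1.2.1 x false = true := by rw [hbx]; simp [hxq]
        rw [if_neg hbxf]
        have hlx1 : PySem.List.pyGetD level1 x' 0 = -1 := by
          rw [hlv1 x' hx'0 hx'n, if_neg hxq]
          exact hlx
        have hI5' : ∀ p ∈ r.2, (1 ≤ p ∧ p ≤ n) ∧ PySem.List.pyGetD level1 p 0 = -1 ∧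
            PySem.List.pyGetD r.1.1 p 0 ≤ 1 ∧ 1 ≤ pvDeg0 edges p := by
          intro p hp
          obtain ⟨hb, hsf, hdle, hds⟩ := w7 p hp
          have hl1 : PySem.List.pyGetD level1 p 0 = -1 := by
            have hh := hI2' p (by omega) hb.2
            rw [hsf] at hh
            cases hv : (PySem.List.pyGetD level1 p 0 == -1)
            · rw [hv] at hh
              simp at hh
            · exact beq_iff_eq.mp hv
          refine ⟨hb, hl1, hdle, ?_⟩
          have hnq : p ∉ q := by
            intro hm
            rw [hlv1 p (by omega) hb.2, if_pos hm] at hl1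
            omega
          have hlv : PySem.List.pyGetD level p 0 = -1 := by
            rw [hlv1 p (by omega) hb.2, if_neg hnq] at hl1
            exact hl1
          have h4 := hI4 p hb.1 hb.2 hlv
          have h5 := hE0 p
          omega
        have hI6' : ∀ t : Int, 1 ≤ t → t ≤ n → PySem.List.pyGetD level1 t 0 = -1 →
            t ∉ r.2 → ¬(PySem.List.pyGetD r.1.1 t 0 ≤ 1 ∧ 1 ≤ pvDeg0 edges t) := by
          intro t h0 h1 hl1 hnin
          have hnq : t ∉ q := by
            intro hm
            rw [hlv1 t (by omega) h1, if_pos hm] at hl1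
            omega
          have hlv : PySem.List.pyGetD level t 0 = -1 := by
            rw [hlv1 t (by omega) h1, if_neg hnq] at hl1
            exact hl1
          have hsf : PySem.List.pyGetD r.1.2.1 t false = false := by
            rw [hI2' t (by omega) h1, hl1]
            simp
          rintro ⟨ha, hb⟩
          have hw8 := w8 t h0 h1 hsf hnin
          have hdg : PySem.List.pyGetD deg t 0 ≤ 1 := by
            by_contra hdg
            exact hw8 ⟨ha, by omega⟩
          exact hI6 t h0 h1 hlv hnq ⟨hdg, hb⟩
        have hrst : r.1 = (r.1.1, r.1.2.1, r.1.2.2) := rfl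
        rw [hrst]
        exact ih fuelA level1 r.1.1 r.1.2.1 r.1.2.2 (lvl+1) r.2
          (by omega)
          (by omega)
          (by rw [hs1len, hll])
          (by rw [w1, hdl])
          (by rw [w2, hsl])
          (by omega)
          hI2'
          (fun t h0 h1 => by
            rw [hlv1 t h0 h1]
            by_cases hm : t ∈ q
            · rw [if_pos hm]
              exact Or.inr ⟨hlvl, by omega⟩
            · rw [if_neg hm]
              rcases hI3 t h0 h1 with h | h
              · exact Or.inl h
              · exact Or.inr ⟨h.1, by omega⟩)
          hI4'
          w9
          hI5'
          hI6'
          (by rw [w4, hI7, hRm'])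
          hlx1
theorem pv_scan (deg : List Int) (x : Int) :
    ∀ (r acc : List Int),
    scanA deg x acc r =
      if (r.filter (fun p => PySem.List.pyGetD deg p 0 == 1)).contains x then none
      else some (acc ++ r.filter (fun p => PySem.List.pyGetD deg p 0 == 1)) := by
  intro r
  induction r with
  | nil => intro acc; simp [scanA]
  | cons pid rest ih =>
    intro acc
    simp only [List.filter_cons]
    by_cases hp : (PySem.List.pyGetD deg pid 0 == 1) = true
    · simp only [hp, if_true]
      by_cases hxp : (pid == x) = true
      · have hnone : scanA deg x acc (pid :: rest) = none := by
          rw [scanA, if_pos hp, if_pos hxp]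
        rw [hnone]
        have hxc : (x == pid) = true := by
          have : pid = x := by simpa using hxp
          simp [this]
        rw [show ((pid :: rest.filter (fun p => PySem.List.pyGetD deg p 0 == 1)).contains x) = true
          from by rw [List.contains_cons, hxc, Bool.true_or]]
        simp
      · have hstep : scanA deg x acc (pid :: rest) = scanA deg x (acc ++ [pid]) rest := by
          rw [scanA, if_pos hp, if_neg hxp]
        rw [hstep, ih]
        have hxc : (x == pid) = false :=
          beq_eq_false_iff_ne.mpr (Ne.symm (by simpa using hxp))
        simp only [List.contains_cons, hxc, Bool.false_or]
        by_cases hc : ((rest.filter (fun p => PySem.List.pyGetD deg p 0 == 1)).contains x) = true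
        · rw [hc]
          simp
        · simp only [Bool.not_eq_true] at hc
          rw [hc]
          simp
    · simp only [Bool.not_eq_true] at hp
      simp only [hp, Bool.false_eq_true, if_false]
      have hstep : scanA deg x acc (pid :: rest) = scanA deg x acc rest := by
        rw [scanA, if_neg (by simp [hp])]
      rw [hstep, ih]

theorem pv_main (n x : Int) (edges : List (List Int)) (hpre : Pre_getWin n x edges) :
    getWin n x edges = getWin_alt n x edges := by
  obtain ⟨hn, hx1, hx2, hge'⟩ := hpre
  have hge : ∀ e ∈ edges, e.length = 2 ∧ ∀ s ∈ e, 1 ≤ s ∧ s ≤ n := hge'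
  have hpb := pv_pairs_mem n edges hge
  set zeros := (PySem.List.pyRange 0 (n+1) 1).map (fun _ => (0:Int)) with hzeros
  have hzlen : zeros.length = (n+1).toNat := by
    rw [hzeros, List.length_map, PySem.List.length_pyRange_one]
    congr 1
    omega
  have hzl : (n : Int) < zeros.length := by rw [hzlen]; omega
  have hzget : ∀ t : Int, 0 ≤ t → t ≤ n → PySem.List.pyGetD zeros t 0 = 0 := by
    intro t h0 h1
    rw [hzeros]
    exact PySem.List.pyGetD_map_pyRange_of_nonneg _ _ _ _ h0 (by omega)
  -- degree array: shared by both ports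
  have hbd2 : (buildA edges zeros).2 = degB n edges := by
    rw [pv_buildA_eq, pv_build_snd, pv_degB_eq]
  obtain ⟨hdegL, hdegG0⟩ := pv_degF_spec n edges zeros hge hzl
  have hdegBG : ∀ t : Int, 0 ≤ t → t ≤ n →
      PySem.List.pyGetD (degB n edges) t 0 = pvDeg0 edges t := by
    intro t h0 h1
    rw [pv_degB_eq, hdegG0 t h0 h1, hzget t h0 h1]
    ring
  have hdegBL : (degB n edges).length = (n+1).toNat := by
    rw [pv_degB_eq, hdegL, hzlen]
  -- evaluate the scan
  have hscan := pv_scan (buildA edges zeros).2 x (PySem.List.pyRange 1 (n+1) 1) []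
  -- the initial-leaf condition, in both forms
  set q0 := (PySem.List.pyRange 1 (n+1) 1).filter
    (fun p => PySem.List.pyGetD (buildA edges zeros).2 p 0 == 1) with hq0
  have hcond : q0.contains x =
      ((decide (1 ≤ x) && decide (x ≤ n)) && (PySem.List.pyGetD (degB n edges) x 0 == 1)) := by
    rw [hq0, hbd2]
    cases hm : ((PySem.List.pyRange 1 (n+1) 1).filter
        (fun p => PySem.List.pyGetD (degB n edges) p 0 == 1)).contains x
    · have hnm : x ∉ (PySem.List.pyRange 1 (n+1) 1).filter
          (fun p => PySem.List.pyGetD (degB n edges) p 0 == 1) := by simpa using hm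
      by_cases hx0 : 1 ≤ x ∧ x ≤ n
      · have hc : (PySem.List.pyGetD (degB n edges) x 0 == 1) = false := by
          cases hc' : (PySem.List.pyGetD (degB n edges) x 0 == 1)
          · rfl
          · exact absurd (List.mem_filter.mpr
              ⟨PySem.List.mem_pyRange_one.mpr ⟨hx0.1, by omega⟩, hc'⟩) hnm
        simp [hc]
      · rcases not_and_or.mp hx0 with h | h <;> simp [h]
    · have hmm : x ∈ (PySem.List.pyRange 1 (n+1) 1).filter
          (fun p => PySem.List.pyGetD (degB n edges) p 0 == 1) := by simpa using hm
      obtain ⟨hr, hcnd⟩ := List.mem_filter.mp hmm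
      have hb := PySem.List.mem_pyRange_one.mp hr
      simp [hcnd, hb.1, show x ≤ n from by omega]
  -- unfold both programs
  rw [getWin, getWin_alt]
  rw [← hzeros]
  rw [hscan]
  by_cases hc : q0.contains x = true
  · rw [if_pos hc]
    have hcB : ((decide (1 ≤ x) && decide (x ≤ n)) &&
        (PySem.List.pyGetD (degB n edges) x 0 == 1)) = true := by rw [← hcond]; exact hc
    rw [hcB]
    simp
  · have hc' : q0.contains x = false := by simpa using hc
    rw [hc']
    have hcB : ((decide (1 ≤ x) && decide (x ≤ n)) &&
        (PySem.List.pyGetD (degB n edges) x 0 == 1)) = false := by rw [← hcond]; exact hc'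
    rw [hcB]
    simp only [Bool.false_eq_true, if_false, List.nil_append]
    -- both tails are the abstract outputs
    show pvOutA x (loopA (buildA edges zeros).1 x (n.toNat + 2 * edges.length + 1) q0
        ((buildA edges zeros).2, (PySem.List.pyRange 0 (n+1) 1).map (fun _ => false), 0)) =
      pvOutB n x (roundsB n edges (degB n edges) (n.toNat + 1)
        ((PySem.List.pyRange 0 (n+1) 1).map (fun _ => (-1:Int))) 0)
    set sel0 := (PySem.List.pyRange 0 (n+1) 1).map (fun _ => false) with hsel0
    set level0 := (PySem.List.pyRange 0 (n+1) 1).map (fun _ => (-1:Int)) with hlevel0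
    have hs0len : sel0.length = (n+1).toNat := by
      rw [hsel0, List.length_map, PySem.List.length_pyRange_one]
      congr 1
      omega
    have hl0len : level0.length = (n+1).toNat := by
      rw [hlevel0, List.length_map, PySem.List.length_pyRange_one]
      congr 1
      omega
    have hl0get : ∀ t : Int, 0 ≤ t → t ≤ n → PySem.List.pyGetD level0 t 0 = -1 := by
      intro t h0 h1
      rw [hlevel0]
      exact PySem.List.pyGetD_map_pyRange_of_nonneg _ _ _ _ h0 (by omega)
    have hs0get : ∀ t : Int, 0 ≤ t → t ≤ n → PySem.List.pyGetD sel0 t false = false := by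
      intro t h0 h1
      rw [hsel0]
      exact PySem.List.pyGetD_map_pyRange_of_nonneg _ _ _ _ h0 (by omega)
    set x' := if x < 0 then x + (n+1) else x with hx'
    have hx'0 : 0 ≤ x' := by rw [hx']; split <;> omega
    have hx'n : x' ≤ n := by rw [hx']; split <;> omega
    have hxb : ∀ l : List Bool, l.length = (n+1).toNat →
        PySem.List.pyGetD l x false = PySem.List.pyGetD l x' false := by
      intro l hlen
      have hlc : (l.length : Int) = n + 1 := by rw [hlen]; omega
      rw [hx']
      by_cases hneg : x < 0
      · rw [if_pos hneg, pv_getD_neg l x false hneg (by omega), hlc]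
      · rw [if_neg hneg]
    have hxi : ∀ l : List Int, l.length = (n+1).toNat →
        PySem.List.pyGetD l x (-1) = PySem.List.pyGetD l x' (-1) := by
      intro l hlen
      have hlc : (l.length : Int) = n + 1 := by rw [hlen]; omega
      rw [hx']
      by_cases hneg : x < 0
      · rw [if_pos hneg, pv_getD_neg l x (-1) hneg (by omega), hlc]
      · rw [if_neg hneg]
    have hE00 : ∀ t : Int, pvE edges level0 t = 0 := by
      intro t
      unfold pvE pvCnt
      rw [pv_countP_congr _ _ (fun _ => false) ?_, List.countP_false]
      · rfl
      · intro a ha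
        have hb := (hpb a ha).1
        rw [hl0get a.1 (by omega) hb.2]
        simp
    have hq0mem : ∀ p : Int, p ∈ q0 ↔ ((1 ≤ p ∧ p ≤ n) ∧
        PySem.List.pyGetD (degB n edges) p 0 = 1) := by
      intro p
      rw [hq0, hbd2, List.mem_filter]
      constructor
      · rintro ⟨hr, hcnd⟩
        have hb := PySem.List.mem_pyRange_one.mp hr
        exact ⟨⟨hb.1, by omega⟩, beq_iff_eq.mp hcnd⟩
      · rintro ⟨⟨h0, h1⟩, hcnd⟩
        exact ⟨PySem.List.mem_pyRange_one.mpr ⟨h0, by omega⟩, beq_iff_eq.mpr hcnd⟩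
    have happly := pv_loop n x x' edges (buildA edges zeros).1 (degB n edges)
      hn hx'0 hx'n hge (fun p => pv_adj_getD edges zeros p) hpb hdegBG hxb hxi
      (n.toNat + 1) (n.toNat + 2 * edges.length + 1)
      level0 (buildA edges zeros).2 sel0 0 0 q0
      (by omega)
      (by
        unfold pvLiveCnt
        have hcg : (PySem.List.pyRange 1 (n+1) 1).countP
            (fun p => PySem.List.pyGetD level0 p 0 == -1) =
            (PySem.List.pyRange 1 (n+1) 1).countP (fun _ => true) := by
          apply pv_countP_congr
          intro p hp
          have hb := PySem.List.mem_pyRange_one.mp hp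
          rw [hl0get p (by omega) (by omega)]
          simp
        rw [hcg, List.countP_true, PySem.List.length_pyRange_one]
        omega)
      hl0len (by rw [hbd2]; exact hdegBL) hs0len (le_refl 0)
      (fun t h0 h1 => by
        rw [hs0get t h0 h1, hl0get t h0 h1]
        simp)
      (fun t h0 h1 => Or.inl (hl0get t h0 h1))
      (fun t h0 h1 _ => by
        rw [hbd2, hdegBG t (by omega) h1, hE00 t]
        ring)
      (List.Nodup.filter _ (PySem.List.nodup_pyRange_one _ _))
      (fun p hp => by
        obtain ⟨hb, hdp⟩ := (hq0mem p).mp hp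
        refine ⟨hb, hl0get p (by omega) hb.2, ?_, ?_⟩
        · rw [hbd2, hdp]
        · rw [← hdegBG p (by omega) hb.2, hdp])
      (fun t h0 h1 _ hnin => by
        rintro ⟨ha, hb⟩
        rw [hbd2, hdegBG t (by omega) h1] at ha
        rw [← hdegBG t (by omega) h1] at hb
        exact hnin ((hq0mem t).mpr ⟨⟨h0, h1⟩, by
          rw [hdegBG t (by omega) h1]
          rw [hdegBG t (by omega) h1] at hb
          omega⟩))
      (by
        unfold pvRmCnt
        rw [pv_countP_congr _ _ (fun _ => false) ?_, List.countP_false]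
        · rfl
        · intro p hp
          have hb := PySem.List.mem_pyRange_one.mp hp
          rw [hl0get p (by omega) (by omega)]
          simp)
      (hl0get x' hx'0 hx'n)
    exact happly

-- ===== VERDICT (by name: the statement is the Claim_ definition above) =====
theorem getWin_spec : Claim_equal_getWin := by
  intro n x edges _ hpre
  exact pv_main n x edges hpre
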